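-- pv_equiv track=rewrite | github.com/manas-17045/LeetcodeSolutions | Leetcode 3701-3800/3757/3757.py | countEffective
-- ===== SOURCE A (Python) =====
-- def countEffective(nums: list[int]) -> int:
--     """
--     Calculates the number of effective subsequences.
--
--     :param nums: A list of integers.
--     :return: The number of effective subsequences modulo 10^9 + 7.
--     """
--     mod = 10 ** 9 + 7
--     k = 0
--     for x in nums:
--         k |= x
--
--     if k == 0:
--         return 0
--
--     limit = 1 << k.bit_length()
--     cnt = [0] * limit
--     for x in nums:
--         cnt[x] += 1
--
--     bitLen = k.bit_length()
--     for i in range(bitLen):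
--         if (k >> i) & 1:
--             bit = 1 << i
--             step = bit * 2
--             for start in range(0, limit, step):
--                 for j in range(start, start + bit):
--                     cnt[j + bit] += cnt[j]
--
--     pow2 = [1] * (len(nums) + 1)
--     curr = 1
--     for i in range(1, len(nums) + 1):
--         curr = (curr * 2) % mod
--         pow2[i] = curr
--
--     dp = [pow2[c] for c in cnt]
--
--     for i in range(bitLen):
--         if (k >> i) & 1:
--             bit = 1 << i
--             step = bit * 2
--             for start in range(0, limit, step):
--                 for j in range(start, start + bit):
--                     val = dp[j + bit] - dp[j]
--                     if val < 0:
--                         val += mod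
--                     dp[j + bit] = val
--
--     totalSubsets = pow2[len(nums)]
--     ans = (totalSubsets - dp[k] + mod) % mod
--
--     return ans
-- ===== SOURCE B (Python) =====
-- def countEffective(nums: list[int]) -> int:
--     """Inclusion-exclusion over the submasks of the full OR, instead of
--     in-place subset-sum (SOS) transforms over arrays."""
--     mod = 10 ** 9 + 7
--     k = 0
--     for x in nums:
--         k |= x
--     if k == 0:
--         return 0
--     n = len(nums)
--     pow2 = [1] * (n + 1)
--     for i in range(1, n + 1):
--         pow2[i] = pow2[i - 1] * 2 % mod
--     kbits = bin(k).count("1")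
--     total = 0
--     for s in range(1 << k.bit_length()):
--         if s & k == s:
--             c = 0
--             for x in nums:
--                 if x & s == x:
--                     c += 1
--             sign = 1 if (kbits - bin(s).count("1")) % 2 == 0 else -1
--             total = (total + sign * pow2[c]) % mod
--     return (pow2[n] - total) % mod
-- ===== Notes on version B (the rewrite author's own statement) =====
-- stated objective: alternative
-- what changed: Replaces the two in-place array SOS (zeta/Moebius) transforms over a size-2^bitlen table with a direct inclusion-exclusion sum over the submasks of the full OR, counting for each submask the elements it covers by a direct scan.
-- outside the precondition, e.g. on countEffective([-1]): A returns 1, B returns 2; on countEffective([-3, 5]): A raises IndexError, B returns 4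
import Mathlib
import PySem

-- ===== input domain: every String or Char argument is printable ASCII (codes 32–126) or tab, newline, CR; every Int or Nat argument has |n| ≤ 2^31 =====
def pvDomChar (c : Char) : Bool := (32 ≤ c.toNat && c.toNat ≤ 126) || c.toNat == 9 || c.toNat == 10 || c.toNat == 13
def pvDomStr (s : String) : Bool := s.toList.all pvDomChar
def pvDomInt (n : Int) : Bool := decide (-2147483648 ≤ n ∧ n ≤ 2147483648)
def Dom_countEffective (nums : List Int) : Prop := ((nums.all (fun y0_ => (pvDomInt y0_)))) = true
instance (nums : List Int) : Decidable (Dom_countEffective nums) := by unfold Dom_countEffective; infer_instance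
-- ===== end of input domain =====

-- ===== PORT A =====
-- 'k >> i' / '1 << i' are ported with i.toNat: exact since i ranges over range(bitLen), i ≥ 0.
def countEffective (nums : List Int) : Int :=
  let md : Int := 10 ^ 9 + 7
  let k : Int := nums.foldl (fun k x => PySem.Int.bor k x) 0
  if k = 0 then 0
  else
    let limit : Int := 1 <<< PySem.Int.bitLength k
    let cnt : List Int := nums.foldl
      (fun cnt x => PySem.List.pySetD cnt x (PySem.List.pyGetD cnt x 0 + 1))
      (List.replicate limit.toNat 0)
    let bitLen : Nat := PySem.Int.bitLength k
    let cnt : List Int := (PySem.List.pyRange 0 (bitLen : Int) 1).foldl (fun cnt i =>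
      if PySem.Int.band (k >>> i.toNat) 1 ≠ 0 then
        let bit : Int := 1 <<< i.toNat
        let step : Int := bit * 2
        (PySem.List.pyRange 0 limit step).foldl (fun cnt start =>
          (PySem.List.pyRange start (start + bit) 1).foldl (fun cnt j =>
            PySem.List.pySetD cnt (j + bit)
              (PySem.List.pyGetD cnt (j + bit) 0 + PySem.List.pyGetD cnt j 0)) cnt) cnt
      else cnt) cnt
    let pc : List Int × Int := (PySem.List.pyRange 1 ((nums.length : Int) + 1) 1).foldl
      (fun (st : List Int × Int) i =>
        let curr := PySem.Int.mod (st.2 * 2) md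
        (PySem.List.pySetD st.1 i curr, curr))
      (List.replicate (nums.length + 1) 1, 1)
    let pow2 : List Int := pc.1
    let dp : List Int := cnt.map (fun c => PySem.List.pyGetD pow2 c 0)
    let dp : List Int := (PySem.List.pyRange 0 (bitLen : Int) 1).foldl (fun dp i =>
      if PySem.Int.band (k >>> i.toNat) 1 ≠ 0 then
        let bit : Int := 1 <<< i.toNat
        let step : Int := bit * 2
        (PySem.List.pyRange 0 limit step).foldl (fun dp start =>
          (PySem.List.pyRange start (start + bit) 1).foldl (fun dp j =>
            let val := PySem.List.pyGetD dp (j + bit) 0 - PySem.List.pyGetD dp j 0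
            let val := if val < 0 then val + md else val
            PySem.List.pySetD dp (j + bit) val) dp) dp
      else dp) dp
    let totalSubsets : Int := PySem.List.pyGetD pow2 (nums.length : Int) 0
    PySem.Int.mod (totalSubsets - PySem.List.pyGetD dp k 0 + md) md

-- ===== PORT B =====
-- 'bin(v).count("1")' is ported as PySem.Int.bitCount: exact for the nonnegative v it is applied to.
def countEffective_alt (nums : List Int) : Int :=
  let md : Int := 10 ^ 9 + 7
  let k : Int := nums.foldl (fun k x => PySem.Int.bor k x) 0
  if k = 0 then 0
  else
    let pow2 : List Int := (PySem.List.pyRange 1 ((nums.length : Int) + 1) 1).foldl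
      (fun p i => PySem.List.pySetD p i (PySem.Int.mod (PySem.List.pyGetD p (i - 1) 0 * 2) md))
      (List.replicate (nums.length + 1) 1)
    let kbits : Nat := PySem.Int.bitCount k
    let total : Int := (PySem.List.pyRange 0 (1 <<< PySem.Int.bitLength k) 1).foldl
      (fun total s =>
        if PySem.Int.band s k = s then
          let c : Int := nums.foldl (fun c x => if PySem.Int.band x s = x then c + 1 else c) 0
          let sign : Int :=
            if PySem.Int.mod ((kbits : Int) - (PySem.Int.bitCount s : Int)) 2 = 0 then 1 else -1
          PySem.Int.mod (total + sign * PySem.List.pyGetD pow2 c 0) md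
        else total) 0
    PySem.Int.mod (PySem.List.pyGetD pow2 (nums.length : Int) 0 - total) md

-- ===== PRECONDITION & SPEC =====
-- Pre_ excludes lists containing a negative number: on those A either raises IndexError
-- (cnt[x] with x out of range) or returns a value produced by Python's negative-index
-- wraparound into the cnt table, which B does not reproduce.
def Pre_countEffective (nums : List Int) : Prop := ∀ x ∈ nums, 0 ≤ x
instance (nums : List Int) : Decidable (Pre_countEffective nums) := by
  unfold Pre_countEffective; infer_instance
def pvWitness_countEffective : List Int := [3, 1]
def Spec_countEffective (nums : List Int) (out : Int) : Prop := out = countEffective_alt nums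
instance (nums : List Int) (out : Int) : Decidable (Spec_countEffective nums out) := by
  unfold Spec_countEffective; infer_instance

-- ===== CLAIM (what is proved, stated in full; the proofs are below) =====
def Claim_equal_countEffective : Prop := ∀ (nums : List Int), Dom_countEffective nums → Pre_countEffective nums → Spec_countEffective nums (countEffective nums)

-- ===== LEMMAS AND PROOFS =====
-- ---- bit-level helpers ----
theorem pvTestBitHigh {t L j : Nat} (h : t < 2^L) (hj : L ≤ j) : t.testBit j = false :=
  Nat.testBit_lt_two_pow (lt_of_lt_of_le h (Nat.pow_le_pow_right (by norm_num) hj))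

theorem pvTestBit_xor_ne {i j : Nat} (h : j ≠ i) (t : Nat) :
    (t ^^^ 2^i).testBit j = t.testBit j := by
  simp [Nat.testBit_xor, Nat.testBit_two_pow_of_ne (fun e => h e.symm)]

theorem pvTestBit_xor_self (t : Nat) (i : Nat) :
    (t ^^^ 2^i).testBit i = !t.testBit i := by
  simp [Nat.testBit_xor, Nat.testBit_two_pow_self]

-- 2^L + t = 2^L ^^^ t for t < 2^L
theorem pvAddPowXor {t L : Nat} (h : t < 2^L) : 2^L + t = 2^L ^^^ t := by
  apply Nat.eq_of_testBit_eq
  intro j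
  rcases lt_trichotomy j L with hj | hj | hj
  · rw [Nat.testBit_two_pow_add_gt hj, Nat.testBit_xor,
      Nat.testBit_two_pow_of_ne (Nat.ne_of_gt hj)]
    simp
  · subst hj
    rw [Nat.testBit_two_pow_add_eq, Nat.testBit_xor, Nat.testBit_two_pow_self,
      Nat.testBit_lt_two_pow h]
    simp
  · have h1 : 2^L + t < 2^j := by
      have : 2^(L+1) ≤ 2^j := Nat.pow_le_pow_right (by norm_num) hj
      have := Nat.pow_succ 2 L ▸ this
      omega
    rw [Nat.testBit_lt_two_pow h1, Nat.testBit_xor,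
      Nat.testBit_two_pow_of_ne (Nat.ne_of_lt hj), pvTestBitHigh h (le_of_lt hj)]
    simp

-- u with bit i set: u ^^^ 2^i = u - 2^i
theorem pvXorSub {u i : Nat} (h : u.testBit i = true) : u ^^^ 2^i = u - 2^i := by
  have hq : u = 2^(i+1) * (u / 2^(i+1)) + u % 2^(i+1) := (Nat.div_add_mod _ _).symm
  have hrlt : u % 2^(i+1) < 2^(i+1) := Nat.mod_lt _ (by positivity)
  have hbit : (u % 2^(i+1)).testBit i = true := by
    rw [Nat.testBit_mod_two_pow]; simp [h]
  have hge : 2^i ≤ u % 2^(i+1) := Nat.ge_two_pow_of_testBit hbit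
  set a := u / 2^(i+1) with ha
  set b := u % 2^(i+1) - 2^i with hb
  have hblt : b < 2^i := by
    have : 2^(i+1) = 2*2^i := by ring
    omega
  have e1 : 2^(i+1) * a = 2^i * (2*a) := by ring
  have e2 : 2^i * (2*a+1) = 2^i * (2*a) + 2^i := by ring
  have hu : u = 2^i * (2*a+1) + b := by omega
  have hu' : u - 2^i = 2^i * (2*a) + b := by omega
  apply Nat.eq_of_testBit_eq
  intro j
  rw [Nat.testBit_xor, hu', Nat.testBit_two_pow_mul_add _ hblt]
  rcases lt_trichotomy j i with hj | hj | hj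
  · rw [Nat.testBit_two_pow_of_ne (Nat.ne_of_gt hj)]
    conv_lhs => rw [hu]
    rw [Nat.testBit_two_pow_mul_add _ hblt]
    simp [hj]
  · subst hj
    rw [Nat.testBit_two_pow_self]
    conv_lhs => rw [hu]
    rw [Nat.testBit_two_pow_mul_add _ hblt]
    simp
  · rw [Nat.testBit_two_pow_of_ne (Nat.ne_of_lt hj)]
    conv_lhs => rw [hu]
    rw [Nat.testBit_two_pow_mul_add _ hblt]
    have hji : ¬ j < i := by omega
    simp only [if_neg hji]
    obtain ⟨m, hm⟩ : ∃ m, j - i = m + 1 := ⟨j - i - 1, by omega⟩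
    rw [hm]
    rw [Nat.testBit_add_one, Nat.testBit_add_one]
    have h1 : (2*a+1)/2 = a := by omega
    have h2 : (2*a)/2 = a := by omega
    rw [h1, h2]
    simp

theorem pvXorHighStays {u i L : Nat} (hi : i < L) (h : 2^L ≤ u) : 2^L ≤ u ^^^ 2^i := by
  by_contra hc
  push_neg at hc
  have h2 : 2^i < 2^L := Nat.pow_lt_pow_right (by norm_num) hi
  have := Nat.xor_lt_two_pow hc h2
  rw [Nat.xor_assoc, Nat.xor_self, Nat.xor_zero] at this
  omega

-- submask basics: x &&& y = x  ↔  every bit of x is in y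
theorem pvAndEqIff {x y : Nat} : x &&& y = x ↔ ∀ j, x.testBit j = true → y.testBit j = true := by
  constructor
  · intro h j hx
    have := congrArg (fun z => z.testBit j) h
    simp only [Nat.testBit_and] at this
    rw [hx] at this
    simpa using this
  · intro h
    apply Nat.eq_of_testBit_eq
    intro j
    rw [Nat.testBit_and]
    cases hx : x.testBit j
    · simp
    · simp [h j hx]

-- ---- popcount over casts, sign helper ----
def pvPc (n : Nat) : Nat := PySem.Int.bitCount (n : Int)

theorem pvPc_zero : pvPc 0 = 0 := by decide

theorem pvPc_halve {n : Nat} (h : 0 < n) : pvPc n = n % 2 + pvPc (n / 2) :=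
  PySem.Int.bitCount_natCast h

theorem pvPc_pow_add {L t : Nat} (h : t < 2^L) : pvPc (2^L + t) = pvPc t + 1 := by
  induction L generalizing t with
  | zero =>
    have : t = 0 := by omega
    subst this
    simp [pvPc_zero]
    decide
  | succ L ih =>
    have hp : (0:Nat) < 2^(L+1) + t := by positivity
    rw [pvPc_halve hp]
    have e1 : (2:Nat)^(L+1) = 2 * 2^L := by ring
    have h1 : (2^(L+1) + t) % 2 = t % 2 := by omega
    have h2 : (2^(L+1) + t) / 2 = 2^L + t / 2 := by omega
    rw [h1, h2, ih (by omega)]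
    rcases Nat.eq_zero_or_pos t with ht | ht
    · subst ht; simp [pvPc_zero]
    · rw [pvPc_halve ht]; omega

def pvSign (a b : Nat) : Int :=
  if PySem.Int.mod ((a : Int) - (b : Int)) 2 = 0 then 1 else -1

theorem pvSign_mod_eq (a b : Nat) :
    pvSign a b = if ((a : Int) - (b : Int)) % 2 = 0 then 1 else -1 := by
  unfold pvSign
  rw [PySem.Int.mod_eq_emod_of_pos (by norm_num)]

theorem pvSign_succ_left (a b : Nat) : pvSign (a + 1) b = -pvSign a b := by
  rw [pvSign_mod_eq, pvSign_mod_eq]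
  push_cast
  split_ifs with h1 h2 h2 <;> first | rfl | (exfalso; omega)

theorem pvSign_succ_both (a b : Nat) : pvSign (a + 1) (b + 1) = pvSign a b := by
  rw [pvSign_mod_eq, pvSign_mod_eq]
  push_cast
  split_ifs with h1 h2 h2 <;> first | rfl | (exfalso; omega)

theorem pvSign_self (a : Nat) : pvSign a a = 1 := by
  rw [pvSign_mod_eq]
  simp

-- ---- functional SOS passes and the signed submask recursion ----
def pvClamp (M x : Int) : Int := if x < 0 then x + M else x

theorem pvModEq_of_eq {M a b : Int} (h : a = b) : a ≡ b [ZMOD M] := by rw [h]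

theorem pvClamp_modEq (M x : Int) : pvClamp M x ≡ x [ZMOD M] := by
  unfold pvClamp
  split_ifs
  · show (x + M) % M = x % M
    have h : x + M = x + M * 1 := by ring
    rw [h, Int.add_mul_emod_self_left]
  · rfl

theorem pvClamp_range {M x : Int} (hM : 0 < M) (h1 : -M < x) (h2 : x < M) :
    0 ≤ pvClamp M x ∧ pvClamp M x < M := by
  unfold pvClamp
  split_ifs <;> omega

def pvPassF (ε : Int) (i : Nat) (g : Nat → Int) : Nat → Int := fun t =>
  if t.testBit i then g t + ε * g (t ^^^ 2^i) else g t

def pvPassM (M : Int) (i : Nat) (g : Nat → Int) : Nat → Int := fun t =>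
  if t.testBit i then pvClamp M (g t - g (t ^^^ 2^i)) else g t

def pvGS (ε : Int) : List Nat → (Nat → Int) → Nat → Int
  | [], g, t => g t
  | i :: bs, g, t =>
      if t.testBit i then pvGS ε bs g t + ε * pvGS ε bs g (t ^^^ 2^i) else pvGS ε bs g t

theorem pvXor_comm3 (t : Nat) (i j : Nat) : t ^^^ 2^j ^^^ 2^i = t ^^^ 2^i ^^^ 2^j := by
  rw [Nat.xor_assoc, Nat.xor_comm (2^j), ← Nat.xor_assoc]

theorem pvGS_aux (ε : Int) (bs : List Nat) (i : Nat) (hnot : i ∉ bs) (g : Nat → Int) :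
    ∀ t, pvGS ε bs (pvPassF ε i g) t = pvGS ε (i :: bs) g t := by
  induction bs generalizing g with
  | nil => intro t; rfl
  | cons j bs ih =>
    intro t
    have hij : i ≠ j := fun e => hnot (e ▸ List.mem_cons_self)
    have hnot' : i ∉ bs := fun h => hnot (List.mem_cons_of_mem _ h)
    have hA : ∀ u : Nat, (u ^^^ 2^j).testBit i = u.testBit i := fun u => pvTestBit_xor_ne hij u
    have hB : ∀ u : Nat, (u ^^^ 2^i).testBit j = u.testBit j :=
      fun u => pvTestBit_xor_ne (Ne.symm hij) u
    have hC : t ^^^ 2^j ^^^ 2^i = t ^^^ 2^i ^^^ 2^j := pvXor_comm3 t i j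
    show pvGS ε (j :: bs) (pvPassF ε i g) t = pvGS ε (i :: j :: bs) g t
    rcases Bool.eq_false_or_eq_true (t.testBit j) with hj | hj <;>
      rcases Bool.eq_false_or_eq_true (t.testBit i) with hi | hi <;>
      simp only [pvGS, ih hnot' g, hA, hB, hC, hi, hj, eq_self_iff_true, Bool.false_eq_true, if_true, if_false] <;> ring

theorem pvGS_foldF (ε : Int) (bs : List Nat) (hnd : bs.Nodup) (g : Nat → Int) :
    ∀ t, (bs.foldl (fun g i => pvPassF ε i g) g) t = pvGS ε bs g t := by
  induction bs generalizing g with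
  | nil => intro t; rfl
  | cons i bs ih =>
    intro t
    have h1 : i ∉ bs := (List.nodup_cons.mp hnd).1
    have h2 : bs.Nodup := (List.nodup_cons.mp hnd).2
    show (bs.foldl (fun g i => pvPassF ε i g) (pvPassF ε i g)) t = _
    rw [ih h2 (pvPassF ε i g) t, pvGS_aux ε bs i h1 g t]

theorem pvGS_auxM (M : Int) (bs : List Nat) (i : Nat) (hnot : i ∉ bs) (g : Nat → Int) :
    ∀ t, pvGS (-1) bs (pvPassM M i g) t ≡ pvGS (-1) (i :: bs) g t [ZMOD M] := by
  induction bs generalizing g with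
  | nil =>
    intro t
    show pvPassM M i g t ≡ pvGS (-1) [i] g t [ZMOD M]
    simp only [pvPassM, pvGS]
    by_cases hi : t.testBit i
    · rw [if_pos hi, if_pos hi]
      exact (pvClamp_modEq M _).trans (pvModEq_of_eq (by ring))
    · rw [if_neg hi, if_neg hi]
  | cons j bs ih =>
    intro t
    have hij : i ≠ j := fun e => hnot (e ▸ List.mem_cons_self)
    have hnot' : i ∉ bs := fun h => hnot (List.mem_cons_of_mem _ h)
    have hA : ∀ u : Nat, (u ^^^ 2^j).testBit i = u.testBit i := fun u => pvTestBit_xor_ne hij u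
    have hB : ∀ u : Nat, (u ^^^ 2^i).testBit j = u.testBit j :=
      fun u => pvTestBit_xor_ne (Ne.symm hij) u
    have hC : t ^^^ 2^j ^^^ 2^i = t ^^^ 2^i ^^^ 2^j := pvXor_comm3 t i j
    show pvGS (-1) (j :: bs) (pvPassM M i g) t ≡ pvGS (-1) (i :: j :: bs) g t [ZMOD M]
    rcases Bool.eq_false_or_eq_true (t.testBit j) with hj | hj
    · have e0 : pvGS (-1) (j :: bs) (pvPassM M i g) t
          = pvGS (-1) bs (pvPassM M i g) t + -1 * pvGS (-1) bs (pvPassM M i g) (t ^^^ 2^j) := by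
        simp only [pvGS]
        rw [if_pos hj]
      rw [e0]
      have comb := Int.ModEq.add (ih hnot' g t) (Int.ModEq.mul_left (-1) (ih hnot' g (t ^^^ 2^j)))
      refine comb.trans ?_
      rcases Bool.eq_false_or_eq_true (t.testBit i) with hi | hi <;>
        simp only [pvGS, hA, hB, hC, hi, hj, eq_self_iff_true, Bool.false_eq_true,
          if_true, if_false] <;>
        exact pvModEq_of_eq (by ring)
    · have e0 : pvGS (-1) (j :: bs) (pvPassM M i g) t = pvGS (-1) bs (pvPassM M i g) t := by
        simp only [pvGS]
        rw [if_neg (by simp [hj])]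
      rw [e0]
      refine (ih hnot' g t).trans ?_
      rcases Bool.eq_false_or_eq_true (t.testBit i) with hi | hi <;>
        simp only [pvGS, hA, hB, hC, hi, hj, eq_self_iff_true, Bool.false_eq_true,
          if_true, if_false] <;>
        exact pvModEq_of_eq (by ring)

theorem pvGS_foldM (M : Int) (bs : List Nat) (hnd : bs.Nodup) (g : Nat → Int) :
    ∀ t, (bs.foldl (fun g i => pvPassM M i g) g) t ≡ pvGS (-1) bs g t [ZMOD M] := by
  induction bs generalizing g with
  | nil => intro t; rfl
  | cons i bs ih =>
    intro t
    have h1 : i ∉ bs := (List.nodup_cons.mp hnd).1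
    have h2 : bs.Nodup := (List.nodup_cons.mp hnd).2
    show (bs.foldl (fun g i => pvPassM M i g) (pvPassM M i g)) t ≡ _ [ZMOD M]
    exact (ih h2 (pvPassM M i g) t).trans (pvGS_auxM M bs i h1 g t)

-- ---- GS structural lemmas ----
theorem pvGS_congr_lt (ε : Int) (bs : List Nat) (L : Nat) (g1 g2 : Nat → Int)
    (hbs : ∀ i ∈ bs, i < L) (h : ∀ u, u < 2^L → g1 u = g2 u) :
    ∀ t, t < 2^L → pvGS ε bs g1 t = pvGS ε bs g2 t := by
  induction bs with
  | nil => intro t ht; exact h t ht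
  | cons i bs ih =>
    intro t ht
    have hiL : i < L := hbs i List.mem_cons_self
    have hbs' : ∀ j ∈ bs, j < L := fun j hj => hbs j (List.mem_cons_of_mem _ hj)
    have hx : t ^^^ 2^i < 2^L :=
      Nat.xor_lt_two_pow ht (Nat.pow_lt_pow_right (by norm_num) hiL)
    simp only [pvGS]
    rw [ih hbs' t ht, ih hbs' (t ^^^ 2^i) hx]

theorem pvSub_xor_bit {t K i : Nat} (ht : t &&& K = t) (hti : t.testBit i = true) :
    (t ^^^ 2^i) &&& K = t ^^^ 2^i := by
  rw [pvAndEqIff]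
  intro j hj
  by_cases hij : j = i
  · subst hij
    rw [pvTestBit_xor_self, hti] at hj
    simp at hj
  · rw [pvTestBit_xor_ne hij] at hj
    exact pvAndEqIff.mp ht j hj

theorem pvGS_congr_sub (ε : Int) (bs : List Nat) (K : Nat) (g1 g2 : Nat → Int)
    (hbs : ∀ i ∈ bs, K.testBit i = true) (h : ∀ u, u &&& K = u → g1 u = g2 u) :
    ∀ t, t &&& K = t → pvGS ε bs g1 t = pvGS ε bs g2 t := by
  induction bs with
  | nil => intro t ht; exact h t ht
  | cons i bs ih =>
    intro t ht
    have hbs' : ∀ j ∈ bs, K.testBit j = true := fun j hj => hbs j (List.mem_cons_of_mem _ hj)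
    simp only [pvGS]
    rcases Bool.eq_false_or_eq_true (t.testBit i) with hti | hti
    · rw [if_pos hti, ih hbs' t ht, ih hbs' (t ^^^ 2^i) (pvSub_xor_bit ht hti), if_pos hti]
    · rw [if_neg (by simp [hti]), ih hbs' t ht, if_neg (by simp [hti])]

theorem pvGS_filter (ε : Int) (bs : List Nat) (hnd : bs.Nodup) (g : Nat → Int) :
    ∀ t, pvGS ε bs g t = pvGS ε (bs.filter (fun i => t.testBit i)) g t := by
  induction bs with
  | nil => intro t; rfl
  | cons i bs ih =>
    intro t
    have h1 : i ∉ bs := (List.nodup_cons.mp hnd).1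
    have h2 : bs.Nodup := (List.nodup_cons.mp hnd).2
    rcases Bool.eq_false_or_eq_true (t.testBit i) with hti | hti
    · rw [List.filter_cons_of_pos (by simp [hti])]
      simp only [pvGS]
      rw [if_pos hti, ih h2 t]
      have hf : List.filter (fun j => (t ^^^ 2^i).testBit j) bs
          = List.filter (fun j => t.testBit j) bs := by
        apply List.filter_congr
        intro j hj
        have hij : j ≠ i := fun e => h1 (e ▸ hj)
        rw [pvTestBit_xor_ne hij]
      rw [ih h2 (t ^^^ 2^i), hf, if_pos hti]
    · rw [List.filter_cons_of_neg (by simp [hti])]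
      simp only [pvGS]
      rw [if_neg (by simp [hti])]
      exact ih h2 t

theorem pvGS_append_singleton (ε : Int) (bs : List Nat) (j : Nat) (g : Nat → Int) :
    ∀ t, pvGS ε (bs ++ [j]) g t = pvGS ε bs (pvPassF ε j g) t := by
  induction bs with
  | nil => intro t; rfl
  | cons i bs ih =>
    intro t
    simp only [List.cons_append, pvGS]
    rw [ih t, ih (t ^^^ 2^i)]

theorem pvGS_high (ε : Int) (bs : List Nat) (L : Nat) (h : Nat → Int)
    (hbs : ∀ i ∈ bs, i < L) :
    ∀ t, t < 2^L → pvGS ε bs h (2^L + t) = pvGS ε bs (fun u => h (2^L + u)) t := by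
  induction bs with
  | nil => intro t ht; rfl
  | cons i bs ih =>
    intro t ht
    have hiL : i < L := hbs i List.mem_cons_self
    have hbs' : ∀ j ∈ bs, j < L := fun j hj => hbs j (List.mem_cons_of_mem _ hj)
    have hx : t ^^^ 2^i < 2^L :=
      Nat.xor_lt_two_pow ht (Nat.pow_lt_pow_right (by norm_num) hiL)
    have htb : (2^L + t).testBit i = t.testBit i := by
      rw [pvAddPowXor ht, Nat.xor_comm, pvTestBit_xor_ne (Nat.ne_of_lt hiL)]
    have hxor : (2^L + t) ^^^ 2^i = 2^L + (t ^^^ 2^i) := by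
      rw [pvAddPowXor ht, pvAddPowXor hx, Nat.xor_assoc]
    simp only [pvGS]
    rw [htb, hxor, ih hbs' t ht, ih hbs' (t ^^^ 2^i) hx]

-- ---- pass invariants ----
theorem pvPassM_range (M : Int) (hM : 0 < M) (i : Nat) (g : Nat → Int)
    (h : ∀ u, 0 ≤ g u ∧ g u < M) : ∀ u, 0 ≤ pvPassM M i g u ∧ pvPassM M i g u < M := by
  intro u
  unfold pvPassM
  split_ifs
  · exact pvClamp_range hM (by have := h u; have := h (u ^^^ 2^i); omega)
      (by have := h u; have := h (u ^^^ 2^i); omega)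
  · exact h u

theorem pvFoldM_range (M : Int) (hM : 0 < M) (bs : List Nat) (g : Nat → Int)
    (h : ∀ u, 0 ≤ g u ∧ g u < M) :
    ∀ u, 0 ≤ (bs.foldl (fun g i => pvPassM M i g) g) u ∧
      (bs.foldl (fun g i => pvPassM M i g) g) u < M := by
  induction bs generalizing g with
  | nil => exact h
  | cons i bs ih => exact ih _ (pvPassM_range M hM i g h)

-- ---- list update helpers ----
theorem pvGetD_set_self (l : List Int) (i : Nat) (v : Int) (h : i < l.length) :
    (l.set i v).getD i 0 = v := by
  simp [List.getD_eq_getElem?_getD, List.getElem?_set_self h]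

theorem pvGetD_set_ne (l : List Int) (i j : Nat) (v : Int) (h : i ≠ j) :
    (l.set i v).getD j 0 = l.getD j 0 := by
  simp [List.getD_eq_getElem?_getD, List.getElem?_set_ne h]

-- ---- generic batch of independent in-place updates ----
theorem pvBatch (F : Int → Int → Int) (src : Nat → Nat) :
    ∀ (T : List Nat) (a : List Int), T.Nodup →
    (∀ t ∈ T, t < a.length) →
    (∀ t ∈ T, ∀ u ∈ T, src t ≠ u) →
    ((T.foldl (fun a t => a.set t (F (a.getD t 0) (a.getD (src t) 0))) a).length = a.length ∧
     ∀ u : Nat, (T.foldl (fun a t => a.set t (F (a.getD t 0) (a.getD (src t) 0))) a).getD u 0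
        = if u ∈ T then F (a.getD u 0) (a.getD (src u) 0) else a.getD u 0) := by
  intro T
  induction T with
  | nil => intro a _ _ _; exact ⟨rfl, fun u => by simp⟩
  | cons t0 T ih =>
    intro a hnd hlen hsrc
    have ht0 : t0 ∉ T := (List.nodup_cons.mp hnd).1
    have hndT : T.Nodup := (List.nodup_cons.mp hnd).2
    set a1 := a.set t0 (F (a.getD t0 0) (a.getD (src t0) 0)) with ha1
    have hlen1 : a1.length = a.length := by simp [ha1]
    have H := ih a1 hndT
      (fun t ht => by rw [hlen1]; exact hlen t (List.mem_cons_of_mem _ ht))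
      (fun t ht u hu => hsrc t (List.mem_cons_of_mem _ ht) u (List.mem_cons_of_mem _ hu))
    refine ⟨by rw [List.foldl_cons]; rw [← ha1]; exact H.1.trans hlen1, ?_⟩
    intro u
    rw [List.foldl_cons, ← ha1, H.2 u]
    by_cases hu : u ∈ T
    · have hne : t0 ≠ u := fun e => ht0 (e ▸ hu)
      have hsne : src u ≠ t0 := hsrc u (List.mem_cons_of_mem _ hu) t0 List.mem_cons_self
      rw [if_pos hu, if_pos (List.mem_cons_of_mem _ hu)]
      rw [ha1, pvGetD_set_ne _ _ _ _ hne, pvGetD_set_ne _ _ _ _ (fun e => hsne e.symm)]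
    · rw [if_neg hu]
      by_cases he : u = t0
      · subst he
        rw [if_pos List.mem_cons_self, ha1,
          pvGetD_set_self _ _ _ (hlen u List.mem_cons_self)]
      · rw [if_neg (by simp [he, hu]), ha1, pvGetD_set_ne _ _ _ _ (fun e => he e.symm)]

-- ---- the target-index list of one SOS pass over bit i ----
def pvJ (i L : Nat) : List Nat :=
  (List.range (2^(L-i-1))).flatMap (fun q => (List.range (2^i)).map (fun r => 2^(i+1)*q + r + 2^i))

theorem pvJ_mem {i L : Nat} (hi : i < L) (u : Nat) :
    u ∈ pvJ i L ↔ (u < 2^L ∧ u.testBit i = true) := by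
  have epow : 2^(i+1) * 2^(L-i-1) = 2^L := by
    rw [← pow_add]; congr 1; omega
  have e2 : (2:Nat)^(i+1) = 2*2^i := by ring
  constructor
  · intro hu
    simp only [pvJ, List.mem_flatMap, List.mem_map, List.mem_range] at hu
    obtain ⟨q, hq, r, hr, rfl⟩ := hu
    constructor
    · have e3 : 2^(i+1)*(q+1) = 2^(i+1)*q + 2^(i+1) := by ring
      have h4 : 2^(i+1)*(q+1) ≤ 2^(i+1)*2^(L-i-1) := Nat.mul_le_mul_left _ (by omega)
      omega
    · have he : 2^(i+1)*q + r + 2^i = 2^i * (2*q+1) + r := by ring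
      rw [he, Nat.testBit_two_pow_mul_add _ hr]
      simp
  · rintro ⟨hu, htb⟩
    simp only [pvJ, List.mem_flatMap, List.mem_map, List.mem_range]
    have hmod : (u % 2^(i+1)).testBit i = true := by
      rw [Nat.testBit_mod_two_pow]; simp [htb]
    have hge : 2^i ≤ u % 2^(i+1) := Nat.ge_two_pow_of_testBit hmod
    have hlt : u % 2^(i+1) < 2^(i+1) := Nat.mod_lt _ (by positivity)
    have hdm : 2^(i+1) * (u / 2^(i+1)) + u % 2^(i+1) = u := Nat.div_add_mod u _
    refine ⟨u / 2^(i+1), ?_, u % 2^(i+1) - 2^i, by omega, by omega⟩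
    rw [Nat.div_lt_iff_lt_mul (by positivity)]
    calc u < 2^L := hu
      _ = 2^(L-i-1) * 2^(i+1) := by rw [Nat.mul_comm]; exact epow.symm
  
theorem pvJ_nodup (i L : Nat) : (pvJ i L).Nodup := by
  have key : ∀ M : Nat, (((List.range M).flatMap
      (fun q => (List.range (2^i)).map (fun r => 2^(i+1)*q + r + 2^i)))).Pairwise (· < ·) := by
    intro M
    induction M with
    | zero => simp
    | succ M ihM =>
      rw [List.range_succ, List.flatMap_append]
      rw [List.pairwise_append]
      refine ⟨ihM, ?_, ?_⟩
      · simp only [List.flatMap_cons, List.flatMap_nil, List.append_nil]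
        rw [List.pairwise_map]
        exact (List.pairwise_lt_range).imp (fun h => by omega)
      · intro x hx y hy
        simp only [List.mem_flatMap, List.mem_map, List.mem_range] at hx
        simp only [List.flatMap_cons, List.flatMap_nil, List.append_nil,
          List.mem_map, List.mem_range] at hy
        obtain ⟨q, hq, r, hr, rfl⟩ := hx
        obtain ⟨r2, hr2, rfl⟩ := hy
        have e3 : 2^(i+1)*(q+1) = 2^(i+1)*q + 2^(i+1) := by ring
        have h4 : 2^(i+1)*(q+1) ≤ 2^(i+1)*M := Nat.mul_le_mul_left _ (by omega)
        have e2 : (2:Nat)^(i+1) = 2*2^i := by ring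
        omega
  exact (key _).imp (fun h => Nat.ne_of_lt h)

-- ---- cast helpers ----
theorem pvSetNat (l : List Int) (n : Nat) (v : Int) :
    PySem.List.pySetD l ((n : Nat) : Int) v = l.set n v := by
  rw [PySem.List.pySetD_of_nonneg _ _ (by positivity)]
  simp

theorem pvGetNat (l : List Int) (n : Nat) (d : Int) :
    PySem.List.pyGetD l ((n : Nat) : Int) d = l.getD n d := by
  rw [PySem.List.pyGetD_of_nonneg _ _ (by positivity)]
  simp

theorem pvShiftOne (n : Nat) : ((1 : Int) <<< n) = ((2^n : Nat) : Int) := by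
  simp [Int.shiftLeft_eq]

-- ---- the outer stepped range of one SOS pass ----
theorem pvRangeStep (i L : Nat) (hi : i < L) :
    PySem.List.pyRange 0 ((2^L : Nat) : Int) (((2^i : Nat) : Int) * 2)
      = (List.range (2^(L-i-1))).map (fun q => ((2^(i+1) * q : Nat) : Int)) := by
  have hs : ((2^i : Nat) : Int) * 2 = ((2^(i+1) : Nat) : Int) := by push_cast; ring
  have hpos : (0:Int) < ((2^(i+1) : Nat) : Int) := by positivity
  rw [hs, PySem.List.pyRange_of_pos _ _ hpos]
  have hlt : (0:Int) < ((2^L : Nat) : Int) := by positivity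
  rw [if_pos hlt]
  have ediv : (((2^L : Nat) : Int) - 0 + ((2^(i+1) : Nat) : Int) - 1) / ((2^(i+1) : Nat) : Int)
      = ((2^(L-i-1) : Nat) : Int) := by
    have e1 : (((2^L : Nat) : Int) - 0 + ((2^(i+1) : Nat) : Int) - 1)
        = (((2^L + 2^(i+1) - 1 : Nat)) : Int) := by
      have h0 : (0:Nat) < 2^L := by positivity
      have : (1:Nat) ≤ 2^L + 2^(i+1) := by omega
      push_cast [this]
      ring
    rw [e1, ← Int.natCast_div]
    congr 1
    have epow : 2^(i+1) * 2^(L-i-1) = 2^L := by rw [← pow_add]; congr 1; omega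
    have e4 : 2^L + 2^(i+1) - 1 = (2^(i+1) - 1) + 2^(i+1) * 2^(L-i-1) := by
      have : (1:Nat) ≤ 2^(i+1) := Nat.one_le_two_pow
      omega
    rw [e4, Nat.add_mul_div_left _ _ (by positivity : 0 < 2^(i+1)),
      Nat.div_eq_of_lt (by omega)]
    omega
  rw [ediv, Int.toNat_natCast]
  apply List.map_congr_left
  intro k _
  push_cast
  ring

-- ---- the inner contiguous range ----
theorem pvRangeBlock (a B : Nat) :
    PySem.List.pyRange ((a : Nat) : Int) (((a : Nat) : Int) + ((B : Nat) : Int)) 1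
      = (List.range B).map (fun r => ((a + r : Nat) : Int)) := by
  rw [PySem.List.pyRange_one]
  have e1 : (((a : Nat) : Int) + ((B : Nat) : Int) - ((a : Nat) : Int)).toNat = B := by simp
  rw [e1]
  apply List.map_congr_left
  intro k _
  push_cast
  ring

-- ---- the double loop of the zeta pass, as a fold over pvJ ----
theorem pvZetaInner (i L : Nat) (hi : i < L) (l : List Int) :
    (PySem.List.pyRange 0 ((2^L : Nat) : Int) (((2^i : Nat) : Int) * 2)).foldl
      (fun cnt start => (PySem.List.pyRange start (start + ((2^i : Nat) : Int)) 1).foldl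
        (fun cnt j => PySem.List.pySetD cnt (j + ((2^i : Nat) : Int))
          (PySem.List.pyGetD cnt (j + ((2^i : Nat) : Int)) 0 + PySem.List.pyGetD cnt j 0)) cnt) l
    = (pvJ i L).foldl (fun a u => a.set u (a.getD u 0 + a.getD (u - 2^i) 0)) l := by
  rw [pvRangeStep i L hi, List.foldl_map]
  unfold pvJ
  rw [List.flatMap, List.foldl_flatten, List.foldl_map]
  apply PySem.List.foldl_congr_mem'
  intro q _ acc
  rw [pvRangeBlock (2^(i+1)*q) (2^i), List.foldl_map, List.foldl_map]
  apply PySem.List.foldl_congr_mem'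
  intro r _ a
  have ec : ((2^(i+1)*q + r : Nat) : Int) + ((2^i : Nat) : Int)
      = ((2^(i+1)*q + r + 2^i : Nat) : Int) := by push_cast; ring
  rw [ec, pvSetNat, pvGetNat, pvGetNat]
  have es : 2^(i+1)*q + r + 2^i - 2^i = 2^(i+1)*q + r := by omega
  rw [es]

-- ---- the double loop of the Moebius pass, as a fold over pvJ ----
theorem pvMobInner (M : Int) (i L : Nat) (hi : i < L) (l : List Int) :
    (PySem.List.pyRange 0 ((2^L : Nat) : Int) (((2^i : Nat) : Int) * 2)).foldl
      (fun dp start => (PySem.List.pyRange start (start + ((2^i : Nat) : Int)) 1).foldl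
        (fun dp j =>
          PySem.List.pySetD dp (j + ((2^i : Nat) : Int))
            (if PySem.List.pyGetD dp (j + ((2^i : Nat) : Int)) 0 - PySem.List.pyGetD dp j 0 < 0
             then PySem.List.pyGetD dp (j + ((2^i : Nat) : Int)) 0 - PySem.List.pyGetD dp j 0 + M
             else PySem.List.pyGetD dp (j + ((2^i : Nat) : Int)) 0 - PySem.List.pyGetD dp j 0)) dp) l
    = (pvJ i L).foldl (fun a u => a.set u (pvClamp M (a.getD u 0 - a.getD (u - 2^i) 0))) l := by
  rw [pvRangeStep i L hi, List.foldl_map]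
  unfold pvJ
  rw [List.flatMap, List.foldl_flatten, List.foldl_map]
  apply PySem.List.foldl_congr_mem'
  intro q _ acc
  rw [pvRangeBlock (2^(i+1)*q) (2^i), List.foldl_map, List.foldl_map]
  apply PySem.List.foldl_congr_mem'
  intro r _ a
  have ec : ((2^(i+1)*q + r : Nat) : Int) + ((2^i : Nat) : Int)
      = ((2^(i+1)*q + r + 2^i : Nat) : Int) := by push_cast; ring
  rw [ec, pvSetNat, pvGetNat, pvGetNat]
  have es : 2^(i+1)*q + r + 2^i - 2^i = 2^(i+1)*q + r := by omega
  rw [es]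
  rfl

theorem pvShiftOneNat (n : Nat) : ((1 <<< n : Nat) : Int) = ((2^n : Nat) : Int) := by
  norm_num [Nat.shiftLeft_eq]

-- ---- one zeta pass over the list equals pvPassF on the getD view ----
theorem pvZetaPass (i L : Nat) (hi : i < L) (l : List Int) (hlen : l.length = 2^L) :
    ((pvJ i L).foldl (fun a u => a.set u (a.getD u 0 + a.getD (u - 2^i) 0)) l).length = 2^L ∧
    ∀ t, ((pvJ i L).foldl (fun a u => a.set u (a.getD u 0 + a.getD (u - 2^i) 0)) l).getD t 0
      = pvPassF 1 i (fun u => l.getD u 0) t := by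
  have hB := pvBatch (fun a b => a + b) (fun u => u - 2^i) (pvJ i L) l (pvJ_nodup i L)
    (fun t ht => by rw [hlen]; exact ((pvJ_mem hi t).mp ht).1)
    (fun t ht u hu => by
      obtain ⟨_, htb⟩ := (pvJ_mem hi t).mp ht
      obtain ⟨_, hub⟩ := (pvJ_mem hi u).mp hu
      intro he
      have he' : t - 2^i = u := he
      have : (t - 2^i).testBit i = false := by
        rw [← pvXorSub htb, pvTestBit_xor_self, htb]; rfl
      rw [he', hub] at this
      simp at this)
  refine ⟨hB.1.trans hlen, ?_⟩
  intro t
  have hB2 := hB.2 t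
  beta_reduce at hB2
  rw [hB2]
  unfold pvPassF
  beta_reduce
  by_cases hmem : t ∈ pvJ i L
  · obtain ⟨htL, htb⟩ := (pvJ_mem hi t).mp hmem
    rw [if_pos hmem, if_pos htb, ← pvXorSub htb]
    ring
  · rw [if_neg hmem]
    rcases Bool.eq_false_or_eq_true (t.testBit i) with htb | htb
    · -- bit set but t out of range
      have htL : ¬ t < 2^L := fun h => hmem ((pvJ_mem hi t).mpr ⟨h, htb⟩)
      have h1 : l.getD t 0 = 0 := List.getD_eq_default _ _ (by omega)
      have h2 : l.getD (t ^^^ 2^i) 0 = 0 :=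
        List.getD_eq_default _ _ (by rw [hlen]; exact pvXorHighStays hi (by omega))
      rw [if_pos htb, h1, h2]
      ring
    · rw [if_neg (by simp [htb])]

-- ---- one Moebius pass over the list equals pvPassM on the getD view ----
theorem pvMobPass (M : Int) (hM : 0 < M) (i L : Nat) (hi : i < L) (l : List Int)
    (hlen : l.length = 2^L) :
    ((pvJ i L).foldl (fun a u => a.set u (pvClamp M (a.getD u 0 - a.getD (u - 2^i) 0))) l).length
        = 2^L ∧
    ∀ t, ((pvJ i L).foldl
        (fun a u => a.set u (pvClamp M (a.getD u 0 - a.getD (u - 2^i) 0))) l).getD t 0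
      = pvPassM M i (fun u => l.getD u 0) t := by
  have hB := pvBatch (fun a b => pvClamp M (a - b)) (fun u => u - 2^i) (pvJ i L) l (pvJ_nodup i L)
    (fun t ht => by rw [hlen]; exact ((pvJ_mem hi t).mp ht).1)
    (fun t ht u hu => by
      obtain ⟨_, htb⟩ := (pvJ_mem hi t).mp ht
      obtain ⟨_, hub⟩ := (pvJ_mem hi u).mp hu
      intro he
      have he' : t - 2^i = u := he
      have : (t - 2^i).testBit i = false := by
        rw [← pvXorSub htb, pvTestBit_xor_self, htb]; rfl
      rw [he', hub] at this
      simp at this)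
  refine ⟨hB.1.trans hlen, ?_⟩
  intro t
  have hB2 := hB.2 t
  beta_reduce at hB2
  rw [hB2]
  unfold pvPassM
  beta_reduce
  by_cases hmem : t ∈ pvJ i L
  · obtain ⟨htL, htb⟩ := (pvJ_mem hi t).mp hmem
    rw [if_pos hmem, if_pos htb, ← pvXorSub htb]
  · rw [if_neg hmem]
    rcases Bool.eq_false_or_eq_true (t.testBit i) with htb | htb
    · have htL : ¬ t < 2^L := fun h => hmem ((pvJ_mem hi t).mpr ⟨h, htb⟩)
      have h1 : l.getD t 0 = 0 := List.getD_eq_default _ _ (by omega)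
      have h2 : l.getD (t ^^^ 2^i) 0 = 0 :=
        List.getD_eq_default _ _ (by rw [hlen]; exact pvXorHighStays hi (by omega))
      rw [if_pos htb, h1, h2]
      simp [pvClamp]
    · rw [if_neg (by simp [htb])]

-- ---- the loop over the bits, list level = function level ----
theorem pvZetaLoop (L : Nat) (bs : List Nat) (hbs : ∀ i ∈ bs, i < L) :
    ∀ (l : List Int), l.length = 2^L →
    ((bs.foldl (fun cnt i =>
        (pvJ i L).foldl (fun a u => a.set u (a.getD u 0 + a.getD (u - 2^i) 0)) cnt) l).length
      = 2^L ∧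
     ∀ t, (bs.foldl (fun cnt i =>
        (pvJ i L).foldl (fun a u => a.set u (a.getD u 0 + a.getD (u - 2^i) 0)) cnt) l).getD t 0
      = (bs.foldl (fun g i => pvPassF 1 i g) (fun u => l.getD u 0)) t) := by
  induction bs with
  | nil => intro l hlen; exact ⟨hlen, fun t => rfl⟩
  | cons i bs ih =>
    intro l hlen
    have hiL : i < L := hbs i List.mem_cons_self
    have hbs' : ∀ j ∈ bs, j < L := fun j hj => hbs j (List.mem_cons_of_mem _ hj)
    have hP := pvZetaPass i L hiL l hlen
    set l1 := (pvJ i L).foldl (fun a u => a.set u (a.getD u 0 + a.getD (u - 2^i) 0)) l with hl1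
    have hfun : (fun u => l1.getD u 0) = pvPassF 1 i (fun u => l.getD u 0) := funext hP.2
    have H := ih hbs' l1 hP.1
    refine ⟨H.1, ?_⟩
    intro t
    rw [List.foldl_cons, List.foldl_cons, ← hl1, H.2 t, hfun]

theorem pvMobLoop (M : Int) (hM : 0 < M) (L : Nat) (bs : List Nat) (hbs : ∀ i ∈ bs, i < L) :
    ∀ (l : List Int), l.length = 2^L →
    ((bs.foldl (fun dp i =>
        (pvJ i L).foldl (fun a u => a.set u (pvClamp M (a.getD u 0 - a.getD (u - 2^i) 0))) dp)
        l).length = 2^L ∧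
     ∀ t, (bs.foldl (fun dp i =>
        (pvJ i L).foldl (fun a u => a.set u (pvClamp M (a.getD u 0 - a.getD (u - 2^i) 0))) dp)
        l).getD t 0
      = (bs.foldl (fun g i => pvPassM M i g) (fun u => l.getD u 0)) t) := by
  induction bs with
  | nil => intro l hlen; exact ⟨hlen, fun t => rfl⟩
  | cons i bs ih =>
    intro l hlen
    have hiL : i < L := hbs i List.mem_cons_self
    have hbs' : ∀ j ∈ bs, j < L := fun j hj => hbs j (List.mem_cons_of_mem _ hj)
    have hP := pvMobPass M hM i L hiL l hlen
    set l1 := (pvJ i L).foldl (fun a u => a.set u (pvClamp M (a.getD u 0 - a.getD (u - 2^i) 0))) l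
      with hl1
    have hfun : (fun u => l1.getD u 0) = pvPassM M i (fun u => l.getD u 0) := funext hP.2
    have H := ih hbs' l1 hP.1
    refine ⟨H.1, ?_⟩
    intro t
    rw [List.foldl_cons, List.foldl_cons, ← hl1, H.2 t, hfun]

-- ---- counting the input values into the table ----
theorem pvCountFold : ∀ (xs : List Int) (a : List Int), (∀ x ∈ xs, x.toNat < a.length) →
    ((xs.foldl (fun a x => a.set x.toNat (a.getD x.toNat 0 + 1)) a).length = a.length ∧
     ∀ t : Nat, (xs.foldl (fun a x => a.set x.toNat (a.getD x.toNat 0 + 1)) a).getD t 0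
        = a.getD t 0 + (xs.countP (fun x => x.toNat == t) : Int)) := by
  intro xs
  induction xs with
  | nil => intro a _; exact ⟨rfl, fun t => by simp⟩
  | cons x xs ih =>
    intro a hx
    set a1 := a.set x.toNat (a.getD x.toNat 0 + 1) with ha1
    have hlen1 : a1.length = a.length := by simp [ha1]
    have H := ih a1 (fun y hy => by rw [hlen1]; exact hx y (List.mem_cons_of_mem _ hy))
    refine ⟨by rw [List.foldl_cons, ← ha1]; exact H.1.trans hlen1, ?_⟩
    intro t
    rw [List.foldl_cons, ← ha1, H.2 t, List.countP_cons]
    by_cases he : x.toNat = t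
    · subst he
      rw [ha1, pvGetD_set_self _ _ _ (hx x List.mem_cons_self)]
      simp
      ring
    · rw [ha1, pvGetD_set_ne _ _ _ _ he]
      simp [he]

-- ---- the running power-of-two tables ----
theorem pvP_succ (j : Nat) : ((2:Int)^(j+1)) % (10^9+7) = ((2:Int)^j % (10^9+7)) * 2 % (10^9+7) := by
  conv_rhs => rw [Int.mul_emod, Int.emod_emod_of_dvd _ (dvd_refl _)]
  rw [← Int.mul_emod]
  ring_nf

theorem pvP_range (j : Nat) : 0 ≤ ((2:Int)^j) % (10^9+7) ∧ ((2:Int)^j) % (10^9+7) < 10^9+7 :=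
  ⟨Int.emod_nonneg _ (by norm_num), Int.emod_lt_of_pos _ (by norm_num)⟩

-- A builds pow2 with a running pair (list, curr)
theorem pvPowA (n : Nat) : ∀ m, m ≤ n →
    (((List.range m).foldl (fun (st : List Int × Int) q =>
        (st.1.set (q+1) (st.2 * 2 % (10^9+7)), st.2 * 2 % (10^9+7)))
      (List.replicate (n+1) 1, 1)).2 = ((2:Int)^m) % (10^9+7) ∧
     ((List.range m).foldl (fun (st : List Int × Int) q =>
        (st.1.set (q+1) (st.2 * 2 % (10^9+7)), st.2 * 2 % (10^9+7)))
      (List.replicate (n+1) 1, 1)).1.length = n+1 ∧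
     ∀ j, j ≤ n →
      ((List.range m).foldl (fun (st : List Int × Int) q =>
        (st.1.set (q+1) (st.2 * 2 % (10^9+7)), st.2 * 2 % (10^9+7)))
      (List.replicate (n+1) 1, 1)).1.getD j 0
        = (if j ≤ m then ((2:Int)^j) % (10^9+7) else 1)) := by
  intro m
  induction m with
  | zero =>
    intro _
    refine ⟨?_, ?_, ?_⟩
    · simp only [List.range_zero, List.foldl_nil]
      norm_num
    · simp only [List.range_zero, List.foldl_nil]
      simp
    · intro j hj
      simp only [List.range_zero, List.foldl_nil]
      rw [List.getD_replicate 1 (by omega : j < n+1)]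
      rcases Nat.eq_zero_or_pos j with rfl | hp
      · rw [if_pos (le_refl 0)]
        norm_num
      · rw [if_neg (by omega)]
  | succ m ih =>
    intro hm
    have H := ih (by omega)
    rw [List.range_succ, List.foldl_append, List.foldl_cons, List.foldl_nil]
    set st := ((List.range m).foldl (fun (st : List Int × Int) q =>
        (st.1.set (q+1) (st.2 * 2 % (10^9+7)), st.2 * 2 % (10^9+7)))
      (List.replicate (n+1) 1, 1)) with hst
    refine ⟨by rw [H.1, ← pvP_succ], by rw [List.length_set]; exact H.2.1, ?_⟩
    intro j hj
    rw [H.1, ← pvP_succ]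
    by_cases he : j = m+1
    · subst he
      rw [pvGetD_set_self _ _ _ (by rw [H.2.1]; omega), if_pos (by omega)]
    · rw [pvGetD_set_ne _ _ _ _ (fun e => he e.symm), H.2.2 j hj]
      by_cases hle : j ≤ m
      · rw [if_pos hle, if_pos (by omega)]
      · rw [if_neg hle, if_neg (by omega)]

-- B builds pow2 by reading the previous entry
theorem pvPowB (n : Nat) : ∀ m, m ≤ n →
    (((List.range m).foldl (fun (p : List Int) q =>
        p.set (q+1) (p.getD q 0 * 2 % (10^9+7))) (List.replicate (n+1) 1)).length = n+1 ∧
     ∀ j, j ≤ n →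
      ((List.range m).foldl (fun (p : List Int) q =>
        p.set (q+1) (p.getD q 0 * 2 % (10^9+7))) (List.replicate (n+1) 1)).getD j 0
        = (if j ≤ m then ((2:Int)^j) % (10^9+7) else 1)) := by
  intro m
  induction m with
  | zero =>
    intro _
    refine ⟨?_, ?_⟩
    · simp only [List.range_zero, List.foldl_nil]
      simp
    · intro j hj
      simp only [List.range_zero, List.foldl_nil]
      rw [List.getD_replicate 1 (by omega : j < n+1)]
      rcases Nat.eq_zero_or_pos j with rfl | hp
      · rw [if_pos (le_refl 0)]
        norm_num
      · rw [if_neg (by omega)]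
  | succ m ih =>
    intro hm
    have H := ih (by omega)
    rw [List.range_succ, List.foldl_append, List.foldl_cons, List.foldl_nil]
    have hread : ((List.range m).foldl (fun (p : List Int) q =>
        p.set (q+1) (p.getD q 0 * 2 % (10^9+7))) (List.replicate (n+1) 1)).getD m 0
        = ((2:Int)^m) % (10^9+7) := by
      rw [H.2 m (by omega), if_pos (le_refl m)]
    rw [hread, ← pvP_succ]
    refine ⟨by rw [List.length_set]; exact H.1, ?_⟩
    intro j hj
    by_cases he : j = m+1
    · subst he
      rw [pvGetD_set_self _ _ _ (by rw [H.1]; omega), if_pos (by omega)]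
    · rw [pvGetD_set_ne _ _ _ _ (fun e => he e.symm), H.2 j hj]
      by_cases hle : j ≤ m
      · rw [if_pos hle, if_pos (by omega)]
      · rw [if_neg hle, if_neg (by omega)]

-- ---- indicator sums ----
theorem pvSumIndicator : ∀ (N : Nat) (w : Nat), w < N → ∀ f : Nat → Int,
    ((List.range N).map (fun v => if v = w then f v else 0)).sum = f w := by
  intro N
  induction N with
  | zero => intro w hw; omega
  | succ N ih =>
    intro w hw f
    rw [List.range_succ, List.map_append, List.sum_append]
    by_cases he : w = N
    · rw [he]
      have h0 : ((List.range N).map (fun v => if v = N then f v else 0)).sum = 0 := by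
        apply List.sum_eq_zero
        intro x hx
        simp only [List.mem_map, List.mem_range] at hx
        obtain ⟨v, hv, rfl⟩ := hx
        rw [if_neg (by omega)]
      rw [h0]
      simp
    · rw [ih w (by omega) f]
      have hne : ¬ (N = w) := fun e => he e.symm
      simp [hne]

theorem pvCountSum (L : Nat) (s : Nat) : ∀ (xs : List Int), (∀ x ∈ xs, x.toNat < 2^L) →
    ((List.range (2^L)).map (fun v => if v &&& s = v
        then (xs.countP (fun x => x.toNat == v) : Int) else 0)).sum
     = (xs.countP (fun x => x.toNat &&& s == x.toNat) : Int) := by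
  intro xs
  induction xs with
  | nil =>
    intro _
    simp only [List.countP_nil]
    rw [Nat.cast_zero]
    apply List.sum_eq_zero
    intro x hx
    simp only [List.mem_map, List.mem_range] at hx
    obtain ⟨v, hv, rfl⟩ := hx
    split_ifs <;> simp
  | cons x xs ih =>
    intro hx
    have hxs := fun y hy => hx y (List.mem_cons_of_mem _ hy)
    have hsplit : ∀ v : Nat, (if v &&& s = v
          then (((x :: xs).countP (fun x => x.toNat == v)) : Int) else 0)
        = (if v &&& s = v then ((xs.countP (fun x => x.toNat == v)) : Int) else 0)
          + (if v = x.toNat then (if v &&& s = v then 1 else 0) else 0) := by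
      intro v
      rw [List.countP_cons]
      by_cases hv : v &&& s = v
      · rw [if_pos hv, if_pos hv]
        by_cases he : v = x.toNat
        · rw [if_pos he, if_pos (by simp [he]), if_pos hv]
          push_cast
          ring
        · rw [if_neg he,
            if_neg (by simp only [beq_iff_eq]; exact fun e => he e.symm),
            Nat.add_zero, add_zero]
      · rw [if_neg hv, if_neg hv]
        simp [hv]
    calc ((List.range (2^L)).map (fun v => if v &&& s = v
            then (((x :: xs).countP (fun x => x.toNat == v)) : Int) else 0)).sum
        = ((List.range (2^L)).map (fun v =>
            (if v &&& s = v then ((xs.countP (fun x => x.toNat == v)) : Int) else 0)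
            + (if v = x.toNat then (if v &&& s = v then 1 else 0) else 0))).sum := by
          congr 1
          exact List.map_congr_left (fun v _ => hsplit v)
      _ = ((List.range (2^L)).map (fun v =>
            if v &&& s = v then ((xs.countP (fun x => x.toNat == v)) : Int) else 0)).sum
          + ((List.range (2^L)).map (fun v =>
            if v = x.toNat then (if v &&& s = v then 1 else 0) else 0)).sum := by
          rw [PySem.List.sum_map_add_int]
      _ = (xs.countP (fun x => x.toNat &&& s == x.toNat) : Int)
          + (if x.toNat &&& s = x.toNat then 1 else 0) := by
          rw [ih hxs, pvSumIndicator (2^L) x.toNat (hx x List.mem_cons_self)]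
      _ = (((x :: xs).countP (fun x => x.toNat &&& s == x.toNat)) : Int) := by
          rw [List.countP_cons]
          by_cases hc : x.toNat &&& s = x.toNat
          · rw [if_pos hc, if_pos (by simp only [beq_iff_eq]; exact hc)]
            push_cast
            ring
          · rw [if_neg hc, if_neg (by simp only [beq_iff_eq]; exact hc)]
            simp

-- ---- submask transfer across the top bit ----
theorem pvSubLow {s K' L : Nat} (hs : s < 2^L) (hK' : K' < 2^L) :
    (s &&& (2^L + K') = s) ↔ (s &&& K' = s) := by
  constructor
  · intro h
    rw [pvAndEqIff] at h ⊢
    intro j hj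
    have hjL : j < L := by
      by_contra hge
      rw [pvTestBitHigh hs (by omega)] at hj
      simp at hj
    have := h j hj
    rwa [Nat.testBit_two_pow_add_gt hjL] at this
  · intro h
    rw [pvAndEqIff] at h ⊢
    intro j hj
    have hjL : j < L := by
      by_contra hge
      rw [pvTestBitHigh hs (by omega)] at hj
      simp at hj
    rw [Nat.testBit_two_pow_add_gt hjL]
    exact h j hj

theorem pvSubHigh {t K' L : Nat} (ht : t < 2^L) (hK' : K' < 2^L) :
    ((2^L + t) &&& (2^L + K') = 2^L + t) ↔ (t &&& K' = t) := by
  have hlt : 2^L + t < 2^(L+1) := by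
    have : (2:Nat)^(L+1) = 2^L + 2^L := by ring
    omega
  constructor
  · intro h
    rw [pvAndEqIff] at h ⊢
    intro j hj
    have hjL : j < L := by
      by_contra hge
      rw [pvTestBitHigh ht (by omega)] at hj
      simp at hj
    have := h j (by rw [Nat.testBit_two_pow_add_gt hjL]; exact hj)
    rwa [Nat.testBit_two_pow_add_gt hjL] at this
  · intro h
    rw [pvAndEqIff] at h ⊢
    intro j hj
    rcases lt_trichotomy j L with hjL | hjL | hjL
    · rw [Nat.testBit_two_pow_add_gt hjL] at hj
      rw [Nat.testBit_two_pow_add_gt hjL]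
      exact h j hj
    · subst hjL
      rw [Nat.testBit_two_pow_add_eq, Nat.testBit_lt_two_pow hK']
      rfl
    · rw [pvTestBitHigh hlt (by omega)] at hj
      simp at hj

theorem pvLtOfTestBitHighFalse {K L : Nat} (h : K < 2^(L+1)) (hf : K.testBit L = false) :
    K < 2^L := by
  by_contra hge
  have hKs : K = 2^L + (K - 2^L) := by omega
  have hlt : K - 2^L < 2^L := by
    have : (2:Nat)^(L+1) = 2^L + 2^L := by ring
    omega
  rw [hKs, Nat.testBit_two_pow_add_eq, Nat.testBit_lt_two_pow hlt] at hf
  simp at hf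

-- ---- bit lists ----
theorem pvBits_succ_true {L K : Nat} (ht : K.testBit L = true) :
    (List.range (L+1)).filter (fun i => K.testBit i)
      = (List.range L).filter (fun i => K.testBit i) ++ [L] := by
  rw [List.range_succ, List.filter_append]
  simp [ht]

theorem pvBits_succ_false {L K : Nat} (hf : K.testBit L = false) :
    (List.range (L+1)).filter (fun i => K.testBit i)
      = (List.range L).filter (fun i => K.testBit i) := by
  rw [List.range_succ, List.filter_append]
  simp [hf]

theorem pvBits_congr {L K K' : Nat} (h : ∀ j, j < L → K.testBit j = K'.testBit j) :
    (List.range L).filter (fun i => K.testBit i)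
      = (List.range L).filter (fun i => K'.testBit i) := by
  apply List.filter_congr
  intro j hj
  rw [List.mem_range] at hj
  rw [h j hj]

theorem pvBits_lt (L K : Nat) :
    ∀ i ∈ (List.range L).filter (fun i => K.testBit i), i < L := by
  intro i hi
  have := (List.mem_filter.mp hi).1
  rwa [List.mem_range] at this

theorem pvBits_nodup (L K : Nat) : ((List.range L).filter (fun i => K.testBit i)).Nodup :=
  (List.nodup_range).filter _

theorem pvBits_testBit (L K : Nat) :
    ∀ i ∈ (List.range L).filter (fun i => K.testBit i), K.testBit i = true := by
  intro i hi
  exact (List.mem_filter.mp hi).2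

-- small xor fact: (2^L + u) ^^^ 2^L = u for u < 2^L
theorem pvAddPowXorCancel {u L : Nat} (hu : u < 2^L) : (2^L + u) ^^^ 2^L = u := by
  rw [pvAddPowXor hu, Nat.xor_comm (2^L) u, Nat.xor_assoc, Nat.xor_self, Nat.xor_zero]

-- ---- the flat zeta sum ----
theorem pvFlatZ : ∀ (L K : Nat), K < 2^L → ∀ g : Nat → Int,
    ((List.range (2^L)).map (fun s => if s &&& K = s then g s else 0)).sum
      = pvGS 1 ((List.range L).filter (fun i => K.testBit i)) g K := by
  intro L
  induction L with
  | zero =>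
    intro K hK g
    have hK0 : K = 0 := by
      rw [pow_zero] at hK
      omega
    subst hK0
    simp [pvGS]
  | succ L ih =>
    intro K hK g
    have e2 : (2:Nat)^(L+1) = 2^L + 2^L := by ring
    rw [e2, List.range_add, List.map_append, List.sum_append, List.map_map]
    rcases Bool.eq_false_or_eq_true (K.testBit L) with ht | hf
    · -- top bit set
      have hKge : 2^L ≤ K := Nat.ge_two_pow_of_testBit ht
      have hK' : K - 2^L < 2^L := by omega
      have hKs : K = 2^L + (K - 2^L) := by omega
      set K' := K - 2^L with hK'def
      have hmap1 : (List.range (2^L)).map (fun s => if s &&& K = s then g s else 0)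
          = (List.range (2^L)).map (fun s => if s &&& K' = s then g s else 0) := by
        apply List.map_congr_left
        intro s hs
        rw [List.mem_range] at hs
        by_cases hc : s &&& K' = s
        · rw [if_pos hc, if_pos (by rw [hKs]; exact (pvSubLow hs hK').mpr hc)]
        · rw [if_neg hc, if_neg (by rw [hKs]; exact fun h => hc ((pvSubLow hs hK').mp h))]
      have hmap2 : (List.range (2^L)).map
            ((fun s => if s &&& K = s then g s else 0) ∘ (fun x => 2^L + x))
          = (List.range (2^L)).map (fun t => if t &&& K' = t then g (2^L + t) else 0) := by
        apply List.map_congr_left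
        intro t hst
        rw [List.mem_range] at hst
        simp only [Function.comp]
        by_cases hc : t &&& K' = t
        · rw [if_pos hc, if_pos (by rw [hKs]; exact (pvSubHigh hst hK').mpr hc)]
        · rw [if_neg hc, if_neg (by rw [hKs]; exact fun h => hc ((pvSubHigh hst hK').mp h))]
      rw [hmap1, hmap2]
      have hcomb : ((List.range (2^L)).map (fun s => if s &&& K' = s then g s else 0)).sum
            + ((List.range (2^L)).map (fun t => if t &&& K' = t then g (2^L + t) else 0)).sum
          = ((List.range (2^L)).map
              (fun t => if t &&& K' = t then g (2^L + t) + g t else 0)).sum := by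
        rw [← PySem.List.sum_map_add_int]
        congr 1
        apply List.map_congr_left
        intro t _
        by_cases hc : t &&& K' = t
        · rw [if_pos hc, if_pos hc, if_pos hc]
          ring
        · rw [if_neg hc, if_neg hc, if_neg hc]
          ring
      rw [hcomb, ih K' hK' (fun u => g (2^L + u) + g u)]
      -- now the GS side
      rw [pvBits_succ_true ht, pvGS_append_singleton]
      have hbits : (List.range L).filter (fun i => K.testBit i)
          = (List.range L).filter (fun i => K'.testBit i) := by
        apply pvBits_congr
        intro j hj
        rw [hKs, Nat.testBit_two_pow_add_gt hj]
      rw [hbits]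
      conv_rhs => rw [hKs]
      rw [pvGS_high 1 _ L _ (pvBits_lt L K') K' hK']
      apply Eq.symm
      apply pvGS_congr_lt 1 _ L _ _ (pvBits_lt L K') _ K' hK'
      intro u hu
      unfold pvPassF
      rw [Nat.testBit_two_pow_add_eq, Nat.testBit_lt_two_pow hu]
      simp only [Bool.not_false, if_true]
      rw [pvAddPowXorCancel hu]
      ring
    · -- top bit clear
      have hKL : K < 2^L := pvLtOfTestBitHighFalse hK hf
      have hzero : ((List.range (2^L)).map
            ((fun s => if s &&& K = s then g s else 0) ∘ (fun x => 2^L + x))).sum = 0 := by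
        apply List.sum_eq_zero
        intro y hy
        simp only [List.mem_map, List.mem_range, Function.comp] at hy
        obtain ⟨t, hst, rfl⟩ := hy
        rw [if_neg]
        intro hcon
        have := pvAndEqIff.mp hcon L (by
          rw [Nat.testBit_two_pow_add_eq, Nat.testBit_lt_two_pow hst]
          rfl)
        rw [this] at hf
        simp at hf
      rw [hzero, add_zero, ih K hKL g, pvBits_succ_false hf]

-- ---- the flat signed (Moebius) sum ----
theorem pvFlatM : ∀ (L K : Nat), K < 2^L → ∀ g : Nat → Int,
    ((List.range (2^L)).map (fun s =>
        if s &&& K = s then pvSign (pvPc K) (pvPc s) * g s else 0)).sum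
      = pvGS (-1) ((List.range L).filter (fun i => K.testBit i)) g K := by
  intro L
  induction L with
  | zero =>
    intro K hK g
    have hK0 : K = 0 := by
      rw [pow_zero] at hK
      omega
    subst hK0
    simp [pvGS, pvSign_self]
  | succ L ih =>
    intro K hK g
    have e2 : (2:Nat)^(L+1) = 2^L + 2^L := by ring
    rw [e2, List.range_add, List.map_append, List.sum_append, List.map_map]
    rcases Bool.eq_false_or_eq_true (K.testBit L) with ht | hf
    · -- top bit set
      have hKge : 2^L ≤ K := Nat.ge_two_pow_of_testBit ht
      have hK' : K - 2^L < 2^L := by omega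
      have hKs : K = 2^L + (K - 2^L) := by omega
      set K' := K - 2^L with hK'def
      have hpc : pvPc K = pvPc K' + 1 := by
        conv_lhs => rw [hKs]
        exact pvPc_pow_add hK'
      have hmap1 : (List.range (2^L)).map (fun s =>
            if s &&& K = s then pvSign (pvPc K) (pvPc s) * g s else 0)
          = (List.range (2^L)).map (fun s =>
            if s &&& K' = s then -(pvSign (pvPc K') (pvPc s) * g s) else 0) := by
        apply List.map_congr_left
        intro s hs
        rw [List.mem_range] at hs
        by_cases hc : s &&& K' = s
        · rw [if_pos hc, if_pos (by rw [hKs]; exact (pvSubLow hs hK').mpr hc)]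
          rw [hpc, pvSign_succ_left]
          ring
        · rw [if_neg hc, if_neg (by rw [hKs]; exact fun h => hc ((pvSubLow hs hK').mp h))]
      have hmap2 : (List.range (2^L)).map
            ((fun s => if s &&& K = s then pvSign (pvPc K) (pvPc s) * g s else 0)
              ∘ (fun x => 2^L + x))
          = (List.range (2^L)).map (fun t =>
            if t &&& K' = t then pvSign (pvPc K') (pvPc t) * g (2^L + t) else 0) := by
        apply List.map_congr_left
        intro t hst
        rw [List.mem_range] at hst
        simp only [Function.comp]
        by_cases hc : t &&& K' = t
        · rw [if_pos hc, if_pos (by rw [hKs]; exact (pvSubHigh hst hK').mpr hc)]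
          rw [hpc, pvPc_pow_add hst, pvSign_succ_both]
        · rw [if_neg hc, if_neg (by rw [hKs]; exact fun h => hc ((pvSubHigh hst hK').mp h))]
      rw [hmap1, hmap2]
      have hcomb : ((List.range (2^L)).map (fun s =>
              if s &&& K' = s then -(pvSign (pvPc K') (pvPc s) * g s) else 0)).sum
            + ((List.range (2^L)).map (fun t =>
              if t &&& K' = t then pvSign (pvPc K') (pvPc t) * g (2^L + t) else 0)).sum
          = ((List.range (2^L)).map (fun t =>
              if t &&& K' = t
              then pvSign (pvPc K') (pvPc t) * (g (2^L + t) + (-1) * g t) else 0)).sum := by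
        rw [← PySem.List.sum_map_add_int]
        congr 1
        apply List.map_congr_left
        intro t _
        by_cases hc : t &&& K' = t
        · rw [if_pos hc, if_pos hc, if_pos hc]
          ring
        · rw [if_neg hc, if_neg hc, if_neg hc]
          ring
      rw [hcomb, ih K' hK' (fun u => g (2^L + u) + (-1) * g u)]
      rw [pvBits_succ_true ht, pvGS_append_singleton]
      have hbits : (List.range L).filter (fun i => K.testBit i)
          = (List.range L).filter (fun i => K'.testBit i) := by
        apply pvBits_congr
        intro j hj
        rw [hKs, Nat.testBit_two_pow_add_gt hj]
      rw [hbits]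
      conv_rhs => rw [hKs]
      rw [pvGS_high (-1) _ L _ (pvBits_lt L K') K' hK']
      apply Eq.symm
      apply pvGS_congr_lt (-1) _ L _ _ (pvBits_lt L K') _ K' hK'
      intro u hu
      unfold pvPassF
      rw [Nat.testBit_two_pow_add_eq, Nat.testBit_lt_two_pow hu]
      simp only [Bool.not_false, if_true]
      rw [pvAddPowXorCancel hu]
    · -- top bit clear
      have hKL : K < 2^L := pvLtOfTestBitHighFalse hK hf
      have hzero : ((List.range (2^L)).map
            ((fun s => if s &&& K = s then pvSign (pvPc K) (pvPc s) * g s else 0)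
              ∘ (fun x => 2^L + x))).sum = 0 := by
        apply List.sum_eq_zero
        intro y hy
        simp only [List.mem_map, List.mem_range, Function.comp] at hy
        obtain ⟨t, hst, rfl⟩ := hy
        rw [if_neg]
        intro hcon
        have := pvAndEqIff.mp hcon L (by
          rw [Nat.testBit_two_pow_add_eq, Nat.testBit_lt_two_pow hst]
          rfl)
        rw [this] at hf
        simp at hf
      rw [hzero, add_zero, ih K hKL g, pvBits_succ_false hf]

-- ---- misc support ----
theorem pvGS_one_nonneg (bs : List Nat) (g : Nat → Int) (h : ∀ u, 0 ≤ g u) :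
    ∀ t, 0 ≤ pvGS 1 bs g t := by
  induction bs with
  | nil => exact h
  | cons i bs ih =>
    intro t
    simp only [pvGS]
    split_ifs
    · have := ih t
      have := ih (t ^^^ 2^i)
      omega
    · exact ih t

theorem pvGetD_map (l : List Int) (f : Int → Int) (t : Nat) (h : t < l.length) :
    (l.map f).getD t 0 = f (l.getD t 0) := by
  rw [List.getD_eq_getElem?_getD, List.getElem?_map, List.getD_eq_getElem?_getD,
    List.getElem?_eq_getElem h]
  simp

theorem pvEqOfModEq {M a b : Int} (hM : 0 < M) (ha0 : 0 ≤ a) (ha1 : a < M)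
    (hb0 : 0 ≤ b) (hb1 : b < M) (h : a ≡ b [ZMOD M]) : a = b := by
  have h1 : a % M = b % M := h
  rw [Int.emod_eq_of_lt ha0 ha1, Int.emod_eq_of_lt hb0 hb1] at h1
  exact h1

-- running modular accumulation of a filtered sum
theorem pvModFold (M : Int) (hM : 0 < M) {α : Type} (cond : α → Prop) [DecidablePred cond]
    (f : α → Int) : ∀ (l : List α) (t0 : Int), 0 ≤ t0 → t0 < M →
    (0 ≤ l.foldl (fun t s => if cond s then (t + f s) % M else t) t0 ∧
     l.foldl (fun t s => if cond s then (t + f s) % M else t) t0 < M ∧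
     l.foldl (fun t s => if cond s then (t + f s) % M else t) t0
       ≡ t0 + (l.map (fun s => if cond s then f s else 0)).sum [ZMOD M]) := by
  intro l
  induction l with
  | nil =>
    intro t0 h0 h1
    exact ⟨h0, h1, by simp⟩
  | cons s l ih =>
    intro t0 h0 h1
    rw [List.foldl_cons, List.map_cons, List.sum_cons]
    by_cases hc : cond s
    · rw [if_pos hc, if_pos hc]
      have H := ih ((t0 + f s) % M) (Int.emod_nonneg _ (by omega)) (Int.emod_lt_of_pos _ hM)
      refine ⟨H.1, H.2.1, H.2.2.trans ?_⟩
      have : (t0 + f s) % M ≡ t0 + f s [ZMOD M] := Int.emod_emod_of_dvd _ (dvd_refl M)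
      refine (Int.ModEq.add_right _ this).trans (pvModEq_of_eq (by ring))
    · rw [if_neg hc, if_neg hc]
      have H := ih t0 h0 h1
      refine ⟨H.1, H.2.1, H.2.2.trans (pvModEq_of_eq (by ring))⟩

-- ---- the OR fold ----
theorem pvSub_or_right (m n : Nat) : n &&& (m ||| n) = n := by
  rw [pvAndEqIff]
  intro j hj
  rw [Nat.testBit_or, hj]
  simp

theorem pvSub_or_left (m n : Nat) : m &&& (m ||| n) = m := by
  rw [pvAndEqIff]
  intro j hj
  rw [Nat.testBit_or, hj]
  simp

theorem pvSub_trans {a b c : Nat} (h1 : a &&& b = a) (h2 : b &&& c = b) : a &&& c = a := by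
  rw [pvAndEqIff] at *
  exact fun j hj => h2 j (h1 j hj)

theorem pvOrFold : ∀ (xs : List Int) (a : Int), 0 ≤ a → (∀ x ∈ xs, 0 ≤ x) →
    (0 ≤ xs.foldl (fun k x => PySem.Int.bor k x) a ∧
     a.toNat &&& (xs.foldl (fun k x => PySem.Int.bor k x) a).toNat = a.toNat ∧
     ∀ x ∈ xs, x.toNat &&& (xs.foldl (fun k x => PySem.Int.bor k x) a).toNat = x.toNat) := by
  intro xs
  induction xs with
  | nil => intro a ha _; exact ⟨ha, by simp, by simp⟩
  | cons x xs ih =>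
    intro a ha hx
    have hx0 : (0:Int) ≤ x := hx x List.mem_cons_self
    have hbor : PySem.Int.bor a x = ((a.toNat ||| x.toNat : Nat) : Int) := by
      have h1 : a = ((a.toNat : Nat) : Int) := by omega
      have h2 : x = ((x.toNat : Nat) : Int) := by omega
      rw [h1, h2]
      rfl
    have H := ih (PySem.Int.bor a x) (by rw [hbor]; positivity)
      (fun y hy => hx y (List.mem_cons_of_mem _ hy))
    rw [List.foldl_cons]
    refine ⟨H.1, ?_, ?_⟩
    · refine pvSub_trans (b := (PySem.Int.bor a x).toNat) ?_ H.2.1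
      rw [hbor, Int.toNat_natCast]
      exact pvSub_or_left _ _
    · intro y hy
      rcases List.mem_cons.mp hy with rfl | hmem
      · refine pvSub_trans (b := (PySem.Int.bor a y).toNat) ?_ H.2.1
        rw [hbor, Int.toNat_natCast]
        exact pvSub_or_right _ _
      · exact H.2.2 y hmem

-- Python's truthiness test (k >> i) & 1 != 0 is testBit
theorem pvCond (K iN : Nat) :
    (PySem.Int.band (((K : Nat) : Int) >>> (((iN : Nat)) : Int)) 1 ≠ 0) ↔ K.testBit iN = true := by
  rw [Int.shiftRight_natCast]
  have h2 : PySem.Int.band ((K >>> iN : Nat) : Int) 1 = ((K >>> iN &&& 1 : Nat) : Int) := rfl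
  rw [h2]
  rw [Nat.testBit, Nat.and_comm]
  constructor
  · intro h
    simp only [bne_iff_ne, ne_eq]
    intro hc
    exact h (by exact_mod_cast congrArg (Nat.cast : Nat → Int) hc)
  · intro h hc
    simp only [bne_iff_ne, ne_eq] at h
    exact h (by exact_mod_cast hc)

-- ---- staged views of the two ports (proof-side names; equal to the ports by rfl) ----
def pvMd : Int := 10 ^ 9 + 7
def pvK (nums : List Int) : Int := nums.foldl (fun k x => PySem.Int.bor k x) 0
def pvL (nums : List Int) : Nat := PySem.Int.bitLength (pvK nums)
def pvLim (nums : List Int) : Int := 1 <<< pvL nums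
def pvCntA (nums : List Int) : List Int :=
  nums.foldl (fun cnt x => PySem.List.pySetD cnt x (PySem.List.pyGetD cnt x 0 + 1))
    (List.replicate (pvLim nums).toNat 0)
def pvCntB (nums : List Int) : List Int :=
  (PySem.List.pyRange 0 ((pvL nums : Nat) : Int) 1).foldl (fun cnt i =>
    if PySem.Int.band (pvK nums >>> i.toNat) 1 ≠ 0 then
      (PySem.List.pyRange 0 (pvLim nums) ((1 <<< i.toNat) * 2)).foldl (fun cnt start =>
        (PySem.List.pyRange start (start + (1 <<< i.toNat)) 1).foldl (fun cnt j =>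
          PySem.List.pySetD cnt (j + (1 <<< i.toNat))
            (PySem.List.pyGetD cnt (j + (1 <<< i.toNat)) 0 + PySem.List.pyGetD cnt j 0)) cnt) cnt
    else cnt) (pvCntA nums)
def pvPowPair (nums : List Int) : List Int × Int :=
  (PySem.List.pyRange 1 ((nums.length : Int) + 1) 1).foldl
    (fun (st : List Int × Int) i =>
      (PySem.List.pySetD st.1 i (PySem.Int.mod (st.2 * 2) pvMd), PySem.Int.mod (st.2 * 2) pvMd))
    (List.replicate (nums.length + 1) 1, 1)
def pvDp0 (nums : List Int) : List Int :=
  (pvCntB nums).map (fun c => PySem.List.pyGetD (pvPowPair nums).1 c 0)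
def pvDpF (nums : List Int) : List Int :=
  (PySem.List.pyRange 0 ((pvL nums : Nat) : Int) 1).foldl (fun dp i =>
    if PySem.Int.band (pvK nums >>> i.toNat) 1 ≠ 0 then
      (PySem.List.pyRange 0 (pvLim nums) ((1 <<< i.toNat) * 2)).foldl (fun dp start =>
        (PySem.List.pyRange start (start + (1 <<< i.toNat)) 1).foldl (fun dp j =>
          PySem.List.pySetD dp (j + (1 <<< i.toNat))
            (if PySem.List.pyGetD dp (j + (1 <<< i.toNat)) 0 - PySem.List.pyGetD dp j 0 < 0
             then PySem.List.pyGetD dp (j + (1 <<< i.toNat)) 0 - PySem.List.pyGetD dp j 0 + pvMd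
             else PySem.List.pyGetD dp (j + (1 <<< i.toNat)) 0 - PySem.List.pyGetD dp j 0)) dp) dp
    else dp) (pvDp0 nums)
def pvPow2B (nums : List Int) : List Int :=
  (PySem.List.pyRange 1 ((nums.length : Int) + 1) 1).foldl
    (fun p i => PySem.List.pySetD p i (PySem.Int.mod (PySem.List.pyGetD p (i - 1) 0 * 2) pvMd))
    (List.replicate (nums.length + 1) 1)
def pvTot (nums : List Int) : Int :=
  (PySem.List.pyRange 0 (1 <<< PySem.Int.bitLength (pvK nums)) 1).foldl
    (fun total s =>
      if PySem.Int.band s (pvK nums) = s then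
        PySem.Int.mod (total +
          (if PySem.Int.mod ((PySem.Int.bitCount (pvK nums) : Int)
              - (PySem.Int.bitCount s : Int)) 2 = 0 then 1 else -1)
          * PySem.List.pyGetD (pvPow2B nums)
              (nums.foldl (fun c x => if PySem.Int.band x s = x then c + 1 else c) 0) 0) pvMd
      else total) 0

theorem pvAeq (nums : List Int) : countEffective nums
    = if pvK nums = 0 then 0
      else PySem.Int.mod (PySem.List.pyGetD (pvPowPair nums).1 (nums.length : Int) 0
        - PySem.List.pyGetD (pvDpF nums) (pvK nums) 0 + pvMd) pvMd := rfl

theorem pvBeq (nums : List Int) : countEffective_alt nums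
    = if pvK nums = 0 then 0
      else PySem.Int.mod (PySem.List.pyGetD (pvPow2B nums) (nums.length : Int) 0
        - pvTot nums) pvMd := rfl

def pvKn (nums : List Int) : Nat := (pvK nums).toNat
def pvBitsN (nums : List Int) : List Nat :=
  (List.range (pvL nums)).filter (fun i => (pvKn nums).testBit i)
def pvCnt0F (nums : List Int) : Nat → Int :=
  fun t => ((nums.countP (fun x => x.toNat == t) : Nat) : Int)
def pvDpfun (nums : List Int) : Nat → Int := fun t => (pvDp0 nums).getD t 0
def pvGB (nums : List Int) : Nat → Int :=
  fun u => ((2:Int)^(nums.countP (fun x => x.toNat &&& u == x.toNat)) % pvMd)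

theorem pvMd_pos : (0:Int) < pvMd := by norm_num [pvMd]

theorem pvK_nonneg (nums : List Int) (hpre : ∀ x ∈ nums, 0 ≤ x) : 0 ≤ pvK nums :=
  (pvOrFold nums 0 le_rfl hpre).1

theorem pvK_cast (nums : List Int) (hpre : ∀ x ∈ nums, 0 ≤ x) :
    pvK nums = ((pvKn nums : Nat) : Int) := by
  have := pvK_nonneg nums hpre
  unfold pvKn
  omega

theorem pvK_sub (nums : List Int) (hpre : ∀ x ∈ nums, 0 ≤ x) :
    ∀ x ∈ nums, x.toNat &&& pvKn nums = x.toNat :=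
  (pvOrFold nums 0 le_rfl hpre).2.2

theorem pvKn_lt (nums : List Int) (hpre : ∀ x ∈ nums, 0 ≤ x) :
    pvKn nums < 2^(pvL nums) := by
  have h := PySem.Int.lt_two_pow_bitLength (pvK nums)
  have h2 : (pvK nums).natAbs = pvKn nums := by
    have := pvK_nonneg nums hpre
    unfold pvKn
    omega
  rw [h2] at h
  exact h

theorem pvX_lt (nums : List Int) (hpre : ∀ x ∈ nums, 0 ≤ x) :
    ∀ x ∈ nums, x.toNat < 2^(pvL nums) := by
  intro x hx
  have h1 := pvK_sub nums hpre x hx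
  have h2 : x.toNat &&& pvKn nums ≤ pvKn nums := Nat.and_le_right
  have := pvKn_lt nums hpre
  omega

theorem pvLim_cast (nums : List Int) : pvLim nums = ((2^(pvL nums) : Nat) : Int) :=
  pvShiftOne (pvL nums)

-- S1: the counting table
theorem pvCntA_char (nums : List Int) (hpre : ∀ x ∈ nums, 0 ≤ x) :
    (pvCntA nums).length = 2^(pvL nums) ∧
    ∀ t, (pvCntA nums).getD t 0 = pvCnt0F nums t := by
  have hAeq : pvCntA nums
      = nums.foldl (fun cnt x => cnt.set x.toNat (cnt.getD x.toNat 0 + 1))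
          (List.replicate (2^(pvL nums)) 0) := by
    unfold pvCntA
    rw [pvLim_cast, Int.toNat_natCast]
    apply PySem.List.foldl_congr_mem'
    intro x hx cnt
    rw [PySem.List.pySetD_of_nonneg _ _ (hpre x hx), PySem.List.pyGetD_of_nonneg _ _ (hpre x hx)]
  rw [hAeq]
  have hC := pvCountFold nums (List.replicate (2^(pvL nums)) 0)
    (fun x hx => by rw [List.length_replicate]; exact pvX_lt nums hpre x hx)
  refine ⟨hC.1.trans (List.length_replicate), ?_⟩
  intro t
  rw [hC.2 t]
  have hrep : (List.replicate (2^(pvL nums)) (0:Int)).getD t 0 = 0 := by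
    by_cases ht : t < 2^(pvL nums)
    · rw [List.getD_replicate _ ht]
    · exact List.getD_eq_default _ _ (by simpa using ht)
  rw [hrep]
  unfold pvCnt0F
  ring

-- S2: the zeta loop
theorem pvCntB_nat (nums : List Int) (hpre : ∀ x ∈ nums, 0 ≤ x) :
    pvCntB nums = (List.range (pvL nums)).foldl (fun cnt iN =>
      if (pvKn nums).testBit iN = true then
        (pvJ iN (pvL nums)).foldl
          (fun a u => a.set u (a.getD u 0 + a.getD (u - 2^iN) 0)) cnt
      else cnt) (pvCntA nums) := by
  unfold pvCntB
  rw [PySem.List.pyRange_zero_nat, List.foldl_map]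
  apply PySem.List.foldl_congr_mem'
  intro iN hiN cnt
  rw [List.mem_range] at hiN
  have ht : (((iN : Nat) : Int)).toNat = iN := Int.toNat_natCast iN
  rw [ht]
  rw [pvShiftOneNat iN, pvLim_cast, pvK_cast nums hpre]
  exact if_congr (pvCond (pvKn nums) iN) (pvZetaInner iN (pvL nums) hiN cnt) rfl

theorem pvCntB_char (nums : List Int) (hpre : ∀ x ∈ nums, 0 ≤ x) :
    (pvCntB nums).length = 2^(pvL nums) ∧
    ∀ t, (pvCntB nums).getD t 0 = pvGS 1 (pvBitsN nums) (pvCnt0F nums) t := by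
  rw [pvCntB_nat nums hpre, PySem.List.foldl_ite_eq_foldl_filter]
  have hfil : (List.range (pvL nums)).filter (fun iN => decide ((pvKn nums).testBit iN = true))
      = pvBitsN nums := by
    unfold pvBitsN
    apply List.filter_congr
    intro i _
    simp
  rw [hfil]
  have hA := pvCntA_char nums hpre
  have hZ := pvZetaLoop (pvL nums) (pvBitsN nums) (pvBits_lt _ _) (pvCntA nums) hA.1
  refine ⟨hZ.1, ?_⟩
  intro t
  rw [hZ.2 t]
  have hfun : (fun u => (pvCntA nums).getD u 0) = pvCnt0F nums := funext hA.2
  rw [hfun, pvGS_foldF 1 (pvBitsN nums) (pvBits_nodup _ _) (pvCnt0F nums) t]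

theorem pvBandNat (a b : Nat) :
    PySem.Int.band ((a : Nat) : Int) ((b : Nat) : Int) = ((a &&& b : Nat) : Int) := rfl

-- S3: A's pow2 pair
theorem pvPowPair_nat (nums : List Int) :
    pvPowPair nums = (List.range nums.length).foldl
      (fun (st : List Int × Int) q =>
        (st.1.set (q+1) (st.2 * 2 % (10^9+7)), st.2 * 2 % (10^9+7)))
      (List.replicate (nums.length + 1) 1, 1) := by
  unfold pvPowPair
  simp only [pvMd]
  rw [PySem.List.pyRange_one, (show (((nums.length : Int) + 1 - 1)).toNat = nums.length by omega),
    List.foldl_map]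
  apply PySem.List.foldl_congr_mem'
  intro q _ st
  rw [PySem.Int.mod_eq_emod_of_pos (by norm_num),
    PySem.List.pySetD_of_nonneg _ _ (by positivity),
    (show ((1:Int) + (q : Int)).toNat = q + 1 by omega)]

theorem pvPow2A_char (nums : List Int) :
    (∀ j, j ≤ nums.length → (pvPowPair nums).1.getD j 0 = (2:Int)^j % pvMd) ∧
    (∀ j, 0 ≤ (pvPowPair nums).1.getD j 0 ∧ (pvPowPair nums).1.getD j 0 < pvMd) := by
  rw [pvPowPair_nat]
  have H := pvPowA nums.length nums.length le_rfl
  simp only [pvMd]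
  constructor
  · intro j hj
    rw [H.2.2 j hj, if_pos hj]
  · intro j
    by_cases hj : j ≤ nums.length
    · rw [H.2.2 j hj, if_pos hj]
      exact pvP_range j
    · rw [List.getD_eq_default _ _ (by rw [H.2.1]; omega)]
      norm_num

-- S4: the dp table before the Moebius passes
theorem pvDp0_char (nums : List Int) (hpre : ∀ x ∈ nums, 0 ≤ x) :
    (pvDp0 nums).length = 2^(pvL nums) ∧
    (∀ t, 0 ≤ pvDpfun nums t ∧ pvDpfun nums t < pvMd) ∧
    (∀ u, u &&& pvKn nums = u → pvDpfun nums u = pvGB nums u) := by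
  have hB := pvCntB_char nums hpre
  have hPA := pvPow2A_char nums
  have hlen : (pvDp0 nums).length = 2^(pvL nums) := by
    unfold pvDp0
    rw [List.length_map, hB.1]
  have hrange : ∀ t, 0 ≤ pvDpfun nums t ∧ pvDpfun nums t < pvMd := by
    intro t
    unfold pvDpfun
    by_cases ht : t < 2^(pvL nums)
    · unfold pvDp0
      rw [pvGetD_map _ _ t (by rw [hB.1]; exact ht)]
      have hc0 : 0 ≤ (pvCntB nums).getD t 0 := by
        rw [hB.2 t]
        exact pvGS_one_nonneg _ _ (fun u => by unfold pvCnt0F; positivity) t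
      rw [PySem.List.pyGetD_of_nonneg _ _ hc0]
      exact hPA.2 _
    · rw [List.getD_eq_default _ _ (by rw [hlen]; omega)]
      exact ⟨le_refl 0, pvMd_pos⟩
  refine ⟨hlen, hrange, ?_⟩
  intro u hu
  have hKlt := pvKn_lt nums hpre
  have hule : u ≤ pvKn nums := by
    have : u &&& pvKn nums ≤ pvKn nums := Nat.and_le_right
    omega
  have hult : u < 2^(pvL nums) := by omega
  unfold pvDpfun pvDp0
  rw [pvGetD_map _ _ u (by rw [hB.1]; exact hult)]
  have hcu : (pvCntB nums).getD u 0
      = ((nums.countP (fun x => x.toNat &&& u == x.toNat) : Nat) : Int) := by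
    rw [hB.2 u, pvGS_filter 1 (pvBitsN nums) (pvBits_nodup _ _) (pvCnt0F nums) u]
    have hfil : (pvBitsN nums).filter (fun i => u.testBit i)
        = (List.range (pvL nums)).filter (fun i => u.testBit i) := by
      unfold pvBitsN
      rw [List.filter_filter]
      apply List.filter_congr
      intro i _
      rcases Bool.eq_false_or_eq_true (u.testBit i) with hb | hb
      · rw [hb, pvAndEqIff.mp hu i hb]
        rfl
      · rw [hb]
        simp
    rw [hfil, ← pvFlatZ (pvL nums) u hult (pvCnt0F nums)]
    have := pvCountSum (pvL nums) u nums (pvX_lt nums hpre)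
    unfold pvCnt0F
    exact this
  rw [hcu, pvGetNat]
  have hcle : nums.countP (fun x => x.toNat &&& u == x.toNat) ≤ nums.length :=
    List.countP_le_length
  unfold pvGB
  exact hPA.1 _ hcle

-- S5: the Moebius loop
theorem pvDpF_nat (nums : List Int) (hpre : ∀ x ∈ nums, 0 ≤ x) :
    pvDpF nums = (List.range (pvL nums)).foldl (fun dp iN =>
      if (pvKn nums).testBit iN = true then
        (pvJ iN (pvL nums)).foldl
          (fun a u => a.set u (pvClamp pvMd (a.getD u 0 - a.getD (u - 2^iN) 0))) dp
      else dp) (pvDp0 nums) := by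
  unfold pvDpF
  rw [PySem.List.pyRange_zero_nat, List.foldl_map]
  apply PySem.List.foldl_congr_mem'
  intro iN hiN dp
  rw [List.mem_range] at hiN
  have ht : (((iN : Nat) : Int)).toNat = iN := Int.toNat_natCast iN
  rw [ht]
  rw [pvShiftOneNat iN, pvLim_cast, pvK_cast nums hpre]
  exact if_congr (pvCond (pvKn nums) iN) (pvMobInner pvMd iN (pvL nums) hiN dp) rfl

theorem pvDpF_val (nums : List Int) (hpre : ∀ x ∈ nums, 0 ≤ x) :
    0 ≤ (pvDpF nums).getD (pvKn nums) 0 ∧ (pvDpF nums).getD (pvKn nums) 0 < pvMd ∧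
    (pvDpF nums).getD (pvKn nums) 0
      ≡ pvGS (-1) (pvBitsN nums) (pvDpfun nums) (pvKn nums) [ZMOD pvMd] := by
  have hD := pvDp0_char nums hpre
  rw [pvDpF_nat nums hpre, PySem.List.foldl_ite_eq_foldl_filter]
  have hfil : (List.range (pvL nums)).filter (fun iN => decide ((pvKn nums).testBit iN = true))
      = pvBitsN nums := by
    unfold pvBitsN
    apply List.filter_congr
    intro i _
    simp
  rw [hfil]
  have hM := pvMobLoop pvMd pvMd_pos (pvL nums) (pvBitsN nums) (pvBits_lt _ _)
    (pvDp0 nums) hD.1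
  rw [hM.2 (pvKn nums)]
  have hfun : (fun u => (pvDp0 nums).getD u 0) = pvDpfun nums := rfl
  rw [hfun]
  have hr := pvFoldM_range pvMd pvMd_pos (pvBitsN nums) (pvDpfun nums) hD.2.1 (pvKn nums)
  exact ⟨hr.1, hr.2, pvGS_foldM pvMd (pvBitsN nums) (pvBits_nodup _ _) (pvDpfun nums) (pvKn nums)⟩

-- S6: B's pow2
theorem pvPow2B_nat (nums : List Int) :
    pvPow2B nums = (List.range nums.length).foldl
      (fun (p : List Int) q => p.set (q+1) (p.getD q 0 * 2 % (10^9+7)))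
      (List.replicate (nums.length + 1) 1) := by
  unfold pvPow2B
  simp only [pvMd]
  rw [PySem.List.pyRange_one, (show (((nums.length : Int) + 1 - 1)).toNat = nums.length by omega),
    List.foldl_map]
  apply PySem.List.foldl_congr_mem'
  intro q _ p
  rw [(show (1:Int) + (q : Int) - 1 = ((q : Nat) : Int) by push_cast; ring), pvGetNat,
    PySem.Int.mod_eq_emod_of_pos (by norm_num),
    PySem.List.pySetD_of_nonneg _ _ (by positivity),
    (show ((1:Int) + (q : Int)).toNat = q + 1 by omega)]

theorem pvPow2B_char (nums : List Int) :
    ∀ j, j ≤ nums.length → (pvPow2B nums).getD j 0 = (2:Int)^j % pvMd := by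
  rw [pvPow2B_nat]
  have H := pvPowB nums.length nums.length le_rfl
  simp only [pvMd]
  intro j hj
  rw [H.2 j hj, if_pos hj]

-- S7: B's total
theorem pvTot_nat (nums : List Int) (hpre : ∀ x ∈ nums, 0 ≤ x) :
    pvTot nums = (List.range (2^(pvL nums))).foldl (fun total sN =>
      if sN &&& pvKn nums = sN then
        (total + pvSign (pvPc (pvKn nums)) (pvPc sN) * pvGB nums sN) % pvMd
      else total) 0 := by
  unfold pvTot
  rw [(show (1 <<< PySem.Int.bitLength (pvK nums) : Int) = ((2^(pvL nums) : Nat) : Int)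
    from pvLim_cast nums)]
  rw [PySem.List.pyRange_zero_nat, List.foldl_map]
  apply PySem.List.foldl_congr_mem'
  intro sN hsN total
  rw [List.mem_range] at hsN
  rw [pvK_cast nums hpre, pvBandNat]
  have hcond : (((sN &&& pvKn nums : Nat) : Int) = ((sN : Nat) : Int)) ↔
      (sN &&& pvKn nums = sN) := Nat.cast_inj
  have hbody : PySem.Int.mod (total +
        (if PySem.Int.mod ((PySem.Int.bitCount (((pvKn nums : Nat) : Int)) : Int)
            - (PySem.Int.bitCount ((sN : Nat) : Int) : Int)) 2 = 0 then 1 else -1)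
        * PySem.List.pyGetD (pvPow2B nums)
            (nums.foldl (fun c x => if PySem.Int.band x ((sN : Nat) : Int) = x then c + 1 else c) 0)
            0) pvMd
      = (total + pvSign (pvPc (pvKn nums)) (pvPc sN) * pvGB nums sN) % pvMd := by
    have hc : nums.foldl (fun c x => if PySem.Int.band x ((sN : Nat) : Int) = x then c + 1 else c) 0
        = ((nums.countP (fun x => x.toNat &&& sN == x.toNat) : Nat) : Int) := by
      rw [PySem.List.foldl_ite_add_one (fun x => PySem.Int.band x ((sN : Nat) : Int) = x) nums 0]
      rw [List.countP_congr]
      · ring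
      · intro x hx
        have hx0 := hpre x hx
        have hxc : x = ((x.toNat : Nat) : Int) := by omega
        constructor
        · intro h
          rw [decide_eq_true_eq] at h
          rw [hxc, pvBandNat] at h
          simp only [beq_iff_eq]
          exact_mod_cast h
        · intro h
          simp only [beq_iff_eq] at h
          rw [decide_eq_true_eq, hxc, pvBandNat]
          exact_mod_cast h
    rw [hc, pvGetNat, pvPow2B_char nums _ List.countP_le_length,
      PySem.Int.mod_eq_emod_of_pos pvMd_pos]
    rfl
  rw [hbody]
  exact if_congr hcond rfl rfl

theorem pvTot_val (nums : List Int) (hpre : ∀ x ∈ nums, 0 ≤ x) :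
    0 ≤ pvTot nums ∧ pvTot nums < pvMd ∧
    pvTot nums ≡ pvGS (-1) (pvBitsN nums) (pvGB nums) (pvKn nums) [ZMOD pvMd] := by
  rw [pvTot_nat nums hpre]
  have H := pvModFold pvMd pvMd_pos (fun sN => sN &&& pvKn nums = sN)
    (fun sN => pvSign (pvPc (pvKn nums)) (pvPc sN) * pvGB nums sN)
    (List.range (2^(pvL nums))) 0 le_rfl pvMd_pos
  refine ⟨H.1, H.2.1, H.2.2.trans ?_⟩
  rw [zero_add, pvFlatM (pvL nums) (pvKn nums) (pvKn_lt nums hpre) (pvGB nums)]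
  exact Int.ModEq.refl _

-- the main equation
theorem pvMain (nums : List Int) (hpre : ∀ x ∈ nums, 0 ≤ x) :
    countEffective nums = countEffective_alt nums := by
  rw [pvAeq, pvBeq]
  by_cases hk : pvK nums = 0
  · rw [if_pos hk, if_pos hk]
  · rw [if_neg hk, if_neg hk]
    have hPA := pvPow2A_char nums
    have h1 : PySem.List.pyGetD (pvPowPair nums).1 ((nums.length : Nat) : Int) 0
        = (2:Int)^nums.length % pvMd := by
      rw [pvGetNat]
      exact hPA.1 nums.length le_rfl
    have h2 : PySem.List.pyGetD (pvPow2B nums) ((nums.length : Nat) : Int) 0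
        = (2:Int)^nums.length % pvMd := by
      rw [pvGetNat]
      exact pvPow2B_char nums nums.length le_rfl
    have hKeq : PySem.List.pyGetD (pvDpF nums) (pvK nums) 0
        = (pvDpF nums).getD (pvKn nums) 0 := by
      rw [pvK_cast nums hpre, pvGetNat]
    have hD := pvDpF_val nums hpre
    have hT := pvTot_val nums hpre
    have hGS : pvGS (-1) (pvBitsN nums) (pvDpfun nums) (pvKn nums)
        = pvGS (-1) (pvBitsN nums) (pvGB nums) (pvKn nums) :=
      pvGS_congr_sub (-1) _ (pvKn nums) _ _ (pvBits_testBit _ _)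
        (pvDp0_char nums hpre).2.2 (pvKn nums) (Nat.and_self _)
    have heq : (pvDpF nums).getD (pvKn nums) 0 = pvTot nums :=
      pvEqOfModEq pvMd_pos hD.1 hD.2.1 hT.1 hT.2.1
        ((hD.2.2.trans (pvModEq_of_eq hGS)).trans hT.2.2.symm)
    rw [h1, h2, hKeq, heq,
      PySem.Int.mod_eq_emod_of_pos pvMd_pos, PySem.Int.mod_eq_emod_of_pos pvMd_pos,
      (show (2:Int)^nums.length % pvMd - pvTot nums + pvMd
        = ((2:Int)^nums.length % pvMd - pvTot nums) + pvMd * 1 by ring),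
      Int.add_mul_emod_self_left]

-- ===== VERDICT (by name: the statement is the Claim_ definition above) =====
theorem countEffective_spec : Claim_equal_countEffective := by
  intro nums _ hpre
  unfold Spec_countEffective
  exact pvMain nums hpre
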